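-- pv_equiv track=rewrite | github.com/AI-BZ/KoreanFencingTracker | app/player_identity.py | _group_by_weapons
-- ===== SOURCE A (Python) =====
-- from typing import Dict, List, Optional, Set, Tuple
-- from collections import defaultdict
--
-- def _group_by_weapons(records: List[Dict]) -> Dict[str, List[Dict]]:
--     """
--     Group records by weapon sets.
--
--     Key insight: A fencer typically specializes in ONE weapon.
--     - Same weapon = could be same person
--     - Completely different weapons = DEFINITELY different people
--
--     Returns: Dict[weapon_key, records]
--     - weapon_key is frozenset of weapons for that group
--     """
--     # First, get weapons per team
--     team_weapons = defaultdict(set)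
--     team_records = defaultdict(list)
--
--     for record in records:
--         team = record.get("team", "")
--         weapon = record.get("weapon", "")
--         if team and weapon:
--             team_weapons[team].add(weapon)
--             team_records[team].append(record)
--
--     if not team_weapons:
--         return {"all": records}
--
--     # Use Union-Find to group teams with overlapping weapons
--     teams_list = list(team_weapons.keys())
--     parent = {t: t for t in teams_list}
--
--     def find(x):
--         if parent[x] != x:
--             parent[x] = find(parent[x])
--         return parent[x]
--
--     def union(x, y):
--         px, py = find(x), find(y)
--         if px != py:
--             parent[py] = px
--
--     # Union teams that share ANY weapon (could be same person)
--     for i, t1 in enumerate(teams_list):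
--         for t2 in teams_list[i+1:]:
--             # If weapons overlap, they COULD be the same person
--             if team_weapons[t1].intersection(team_weapons[t2]):
--                 union(t1, t2)
--
--     # Group teams by root
--     team_groups = defaultdict(list)
--     for team in teams_list:
--         root = find(team)
--         team_groups[root].append(team)
--
--     # If all teams are in one group, return single group
--     if len(team_groups) == 1:
--         return {"all": records}
--
--     # Create weapon groups with their records
--     result = {}
--     for root, teams in team_groups.items():
--         # Collect all weapons for this group
--         group_weapons = set()
--         group_records = []
--         for team in teams:
--             group_weapons.update(team_weapons[team])
--             group_records.extend(team_records[team])
--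
--         # Add records without team
--         for record in records:
--             if not record.get("team"):
--                 # Assign to matching weapon group or first group
--                 if record.get("weapon") in group_weapons:
--                     group_records.append(record)
--
--         weapon_key = "_".join(sorted(group_weapons)) if group_weapons else "unknown"
--         result[weapon_key] = group_records
--
--     return result
-- ===== SOURCE B (Python) =====
-- def _group_by_weapons(records):
--     """Same grouping; builds a weapon->teams inverted index and chains unions per
--     weapon (no all-pairs overlap tests), derives weapon sets from the per-team
--     record lists, and assembles groups by root dedup + filtering."""
--     team_records = {}
--     for r in records:
--         if r.get("team", "") and r.get("weapon", ""):
--             team_records.setdefault(r.get("team", ""), []).append(r)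
--
--     if not team_records:
--         return {"all": records}
--
--     team_weapons = {t: {r.get("weapon", "") for r in rs}
--                     for t, rs in team_records.items()}
--
--     weapon_teams = {}
--     for t, ws in team_weapons.items():
--         for w in ws:
--             weapon_teams.setdefault(w, []).append(t)
--
--     parent = {t: t for t in team_records}
--
--     def find(x):
--         while parent[x] != x:
--             x = parent[x]
--         return x
--
--     for teams in weapon_teams.values():
--         for t in teams[1:]:
--             ra, rb = find(teams[0]), find(t)
--             if ra != rb:
--                 parent[rb] = ra
--
--     teams_list = list(team_records)
--     roots = [find(t) for t in teams_list]
--     order = []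
--     for r in roots:
--         if r not in order:
--             order.append(r)
--
--     if len(order) == 1:
--         return {"all": records}
--
--     orphans = [r for r in records if not r.get("team")]
--     result = {}
--     for root in order:
--         teams = [t for t, rt in zip(teams_list, roots) if rt == root]
--         gw = set()
--         for t in teams:
--             gw |= team_weapons[t]
--         gr = [r for t in teams for r in team_records[t]]
--         gr += [r for r in orphans if r.get("weapon") in gw]
--         key = "_".join(sorted(gw)) if gw else "unknown"
--         result[key] = gr
--     return result
-- ===== Notes on version B (the rewrite author's own statement) =====
-- stated objective: alternative
-- what changed: A tests every pair of teams for overlapping weapon sets and unions them with a recursive path-compressing union-find; B builds a weapon->teams inverted index and chains the teams of each weapon with an iterative find, derives each team's weapon set from its record list instead of building both dicts in one pass, and assembles the groups by deduplicating the root list and filtering teams per root instead of a root-keyed dict, with the teamless records filtered once up front.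
import Mathlib
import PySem

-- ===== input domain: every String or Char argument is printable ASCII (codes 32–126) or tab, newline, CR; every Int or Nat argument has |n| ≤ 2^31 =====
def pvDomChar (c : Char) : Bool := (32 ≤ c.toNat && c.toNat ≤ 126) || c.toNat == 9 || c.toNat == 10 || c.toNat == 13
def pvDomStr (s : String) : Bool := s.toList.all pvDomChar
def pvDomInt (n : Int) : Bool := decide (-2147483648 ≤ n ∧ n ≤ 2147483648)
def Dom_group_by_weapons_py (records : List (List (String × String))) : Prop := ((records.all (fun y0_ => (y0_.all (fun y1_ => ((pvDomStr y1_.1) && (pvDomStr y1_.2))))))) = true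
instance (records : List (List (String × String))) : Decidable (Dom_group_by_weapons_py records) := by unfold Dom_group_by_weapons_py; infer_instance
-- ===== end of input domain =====

-- B replaces A's all-pairs weapon-overlap union-find by a weapon->teams inverted
-- index with one chain of unions per weapon, derives the per-team weapon sets from
-- the per-team record lists, and assembles groups by root dedup + filtering
-- (objective: alternative).

-- shared record-access helpers (both Pythons use the identical `record.get` idioms)
def pvRecGet? (r : List (String × String)) (k : String) : Option String :=
  (PySem.Dict.mk r).get? k

def pvRecGetD (r : List (String × String)) (k d : String) : String :=
  (PySem.Dict.mk r).getD k d

-- `not record.get("team")` (falsy: missing key or empty string)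
def pvNoTeam (r : List (String × String)) : Bool :=
  match pvRecGet? r "team" with
  | none => true
  | some t => t == ""

-- `record.get("weapon") in group_weapons`
def pvWeaponIn (r : List (String × String)) (gw : PySem.Set String) : Bool :=
  match pvRecGet? r "weapon" with
  | none => false
  | some w => gw.contains w

-- ===== PORT A =====

-- the first loop of A: team_weapons (defaultdict(set)) and team_records (defaultdict(list))
def pvCollectA (records : List (List (String × String))) :
    PySem.Dict String (PySem.Set String) × PySem.Dict String (List (List (String × String))) :=
  records.foldl (fun tp record =>
    let team := pvRecGetD record "team" ""
    let weapon := pvRecGetD record "weapon" ""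
    if team ≠ "" ∧ weapon ≠ "" then
      (tp.1.modify team PySem.Set.empty (fun s => PySem.Set.add s weapon),
       tp.2.modify team [] (fun l => l ++ [record]))
    else tp) (PySem.Dict.mk [], PySem.Dict.mk [])

-- A's recursive `find` with path compression (fuel makes the recursion structural;
-- fuel = dict size always suffices on the reachable states)
def pvFindA (fuel : Nat) (p : PySem.Dict String String) (x : String) :
    String × PySem.Dict String String :=
  match fuel with
  | 0 => (x, p)
  | fuel + 1 =>
    match p.get? x with
    | none => (x, p)
    | some px =>
      if px = x then (x, p)
      else
        let rp := pvFindA fuel p px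
        (rp.1, rp.2.insert x rp.1)

-- A's `union`
def pvUnionA (p : PySem.Dict String String) (x y : String) : PySem.Dict String String :=
  let r1 := pvFindA p.size p x
  let r2 := pvFindA r1.2.size r1.2 y
  if r1.1 ≠ r2.1 then r2.2.insert r2.1 r1.1 else r2.2

def group_by_weapons_py (records : List (List (String × String))) :
    List (String × List (List (String × String))) :=
  let tw := (pvCollectA records).1
  let tr := (pvCollectA records).2
  if tw.size = 0 then [("all", records)]
  else
    let teams_list := tw.keys
    let parent0 := teams_list.foldl (fun p t => p.insert t t) (PySem.Dict.mk [])
    -- for i, t1 in enumerate(teams_list): for t2 in teams_list[i+1:]: if overlap: union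
    let parent1 := (PySem.List.enumerate teams_list 0).foldl (fun p it =>
        (PySem.List.slice teams_list (some (it.1 + 1)) none).foldl (fun p t2 =>
          if PySem.Set.inter (tw.getD it.2 PySem.Set.empty) (tw.getD t2 PySem.Set.empty) ≠ [] then
            pvUnionA p it.2 t2
          else p) p) parent0
    -- team_groups[find(team)].append(team)  (find keeps mutating parent)
    let gp := teams_list.foldl (fun (gp : PySem.Dict String (List String) × PySem.Dict String String) team =>
        let rp := pvFindA gp.2.size gp.2 team
        (gp.1.modify rp.1 [] (fun l => l ++ [team]), rp.2)) (PySem.Dict.mk [], parent1)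
    let team_groups := gp.1
    if team_groups.size = 1 then [("all", records)]
    else
      (team_groups.items.foldl (fun res rt =>
        let gw := rt.2.foldl (fun s t => PySem.Set.update s (tw.getD t PySem.Set.empty)) PySem.Set.empty
        let gr := rt.2.foldl (fun l t => l ++ tr.getD t []) []
        let gr := records.foldl (fun l record =>
            if pvNoTeam record then
              if pvWeaponIn record gw then l ++ [record] else l
            else l) gr
        let key := if gw ≠ [] then PySem.Str.join "_" (PySem.List.sorted gw (fun x => x) false)
                   else "unknown"
        res.insert key gr) (PySem.Dict.mk [] : PySem.Dict String (List (List (String × String))))).items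

-- ===== PORT B =====

-- B's first loop: only team_records (setdefault(...).append)
def pvCollectB (records : List (List (String × String))) :
    PySem.Dict String (List (List (String × String))) :=
  records.foldl (fun tr r =>
    if pvRecGetD r "team" "" ≠ "" ∧ pvRecGetD r "weapon" "" ≠ "" then
      let tr1 := tr.setdefault (pvRecGetD r "team" "") []
      tr1.insert (pvRecGetD r "team" "") (tr1.getD (pvRecGetD r "team" "") [] ++ [r])
    else tr) (PySem.Dict.mk [])

-- `{r.get("weapon", "") for r in rs}`
def pvWeaponsOf (rs : List (List (String × String))) : PySem.Set String :=
  rs.foldl (fun s r => PySem.Set.add s (pvRecGetD r "weapon" "")) PySem.Set.empty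

-- the dict comprehension `{t: {...} for t, rs in team_records.items()}`
def pvDeriveW (tr : PySem.Dict String (List (List (String × String)))) :
    PySem.Dict String (PySem.Set String) :=
  PySem.Dict.mk (tr.items.map (fun p => (p.1, pvWeaponsOf p.2)))

-- B's iterative `find` (no compression; fuel = dict size suffices)
def pvFindB (fuel : Nat) (p : PySem.Dict String String) (x : String) : String :=
  match fuel with
  | 0 => x
  | fuel + 1 =>
    match p.get? x with
    | none => x
    | some px => if px = x then x else pvFindB fuel p px

def group_by_weapons_py_alt (records : List (List (String × String))) :
    List (String × List (List (String × String))) :=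
  let tr := pvCollectB records
  if tr.size = 0 then [("all", records)]
  else
    let tw := pvDeriveW tr
    -- inverted index: weapon -> teams using it
    let wt := tw.items.foldl (fun wt tws =>
        tws.2.foldl (fun (wt : PySem.Dict String (List String)) w =>
          let wt1 := wt.setdefault w []
          wt1.insert w (wt1.getD w [] ++ [tws.1])) wt) (PySem.Dict.mk [])
    let parent0 := tr.keys.foldl (fun p t => p.insert t t) (PySem.Dict.mk [])
    -- chain all teams of each weapon to the first one
    let parent := wt.values.foldl (fun p teams =>
        match teams with
        | [] => p
        | t0 :: rest => rest.foldl (fun p t =>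
            let ra := pvFindB p.size p t0
            let rb := pvFindB p.size p t
            if ra ≠ rb then p.insert rb ra else p) p) parent0
    let teams_list := tr.keys
    let roots := teams_list.map (fun t => pvFindB parent.size parent t)
    let order := roots.foldl (fun o r => if r ∈ o then o else o ++ [r]) []
    if order.length = 1 then [("all", records)]
    else
      let orphans := records.filter (fun r => pvNoTeam r)
      (order.foldl (fun res root =>
        let teams := ((teams_list.zip roots).filter (fun p => p.2 == root)).map Prod.fst
        let gw := teams.foldl (fun s t => PySem.Set.update s (tw.getD t PySem.Set.empty)) PySem.Set.empty
        let gr := teams.flatMap (fun t => tr.getD t [])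
        let gr := gr ++ orphans.filter (fun r => pvWeaponIn r gw)
        let key := if gw ≠ [] then PySem.Str.join "_" (PySem.List.sorted gw (fun x => x) false)
                   else "unknown"
        res.insert key gr) (PySem.Dict.mk [] : PySem.Dict String (List (List (String × String))))).items

-- ===== PRECONDITION & SPEC =====
def Spec_group_by_weapons_py (records : List (List (String × String))) (out : List (String × List (List (String × String)))) : Prop := out = group_by_weapons_py_alt records
instance (records : List (List (String × String))) (out : List (String × List (List (String × String)))) : Decidable (Spec_group_by_weapons_py records out) := by unfold Spec_group_by_weapons_py; infer_instance

-- ===== CLAIM (what is proved, stated in full; the proofs are below) =====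
def Claim_equal_group_by_weapons_py : Prop := ∀ (records : List (List (String × String))), Dom_group_by_weapons_py records → Spec_group_by_weapons_py records (group_by_weapons_py records)


-- ===== LEMMAS AND PROOFS =====

-- ---------- Section UF core ----------
def pvPD (p : PySem.Dict String String) (x : String) : String := (p.get? x).getD x

def pvChain (p : PySem.Dict String String) : Nat → String → String
  | 0, x => x
  | n+1, x => pvChain p n (pvPD p x)

def pvIsRoot (p : PySem.Dict String String) (r : String) : Prop := pvPD p r = r

def pvRoot (p : PySem.Dict String String) (x r : String) : Prop :=
  ∃ n, pvChain p n x = r ∧ pvIsRoot p r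

def pvSame (p : PySem.Dict String String) (x y : String) : Prop :=
  ∃ r, pvRoot p x r ∧ pvRoot p y r

def pvWF (L : List String) (p : PySem.Dict String String) : Prop :=
  p.keys = L ∧ (∀ x ∈ L, pvPD p x ∈ L) ∧ (∀ x ∈ L, ∃ r, pvRoot p x r)

lemma pvChain_succ_last (p : PySem.Dict String String) (n : Nat) (x : String) :
    pvChain p (n+1) x = pvPD p (pvChain p n x) := by
  induction n generalizing x with
  | zero => rfl
  | succ m ih => simp only [pvChain] at *; rw [ih]

lemma pvChain_add (p : PySem.Dict String String) (m n : Nat) (x : String) :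
    pvChain p (m+n) x = pvChain p n (pvChain p m x) := by
  induction m generalizing x with
  | zero => rw [Nat.zero_add]; rfl
  | succ k ih =>
    have h1 : k + 1 + n = (k + n) + 1 := by omega
    rw [h1]
    simp only [pvChain]
    rw [ih]

lemma pvIsRoot_chain {p : PySem.Dict String String} {r : String} (h : pvIsRoot p r) :
    ∀ n, pvChain p n r = r := by
  intro n; induction n with
  | zero => rfl
  | succ m ih =>
    simp only [pvChain]
    rw [show pvPD p r = r from h]
    exact ih

lemma pvRoot_unique {p : PySem.Dict String String} {x r r' : String}
    (h : pvRoot p x r) (h' : pvRoot p x r') : r = r' := by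
  obtain ⟨n, hn, hr⟩ := h
  obtain ⟨m, hm, hr'⟩ := h'
  rcases le_total n m with hle | hle
  · have h2 := pvChain_add p n (m - n) x
    rw [Nat.add_sub_cancel' hle, hm, hn, pvIsRoot_chain hr] at h2
    exact h2.symm
  · have h2 := pvChain_add p m (n - m) x
    rw [Nat.add_sub_cancel' hle, hn, hm, pvIsRoot_chain hr'] at h2
    exact h2

lemma pvRoot_isRoot {p : PySem.Dict String String} {x r : String} (h : pvRoot p x r) :
    pvIsRoot p r := h.choose_spec.2

lemma pvRoot_of_step {p : PySem.Dict String String} {x r : String}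
    (h : pvRoot p (pvPD p x) r) : pvRoot p x r := by
  obtain ⟨n, hn, hr⟩ := h
  exact ⟨n+1, by simpa [pvChain] using hn, hr⟩

lemma pvRoot_not_mem {p : PySem.Dict String String} {x : String} (h : x ∉ p.keys) :
    pvRoot p x x := by
  have : p.get? x = none := (PySem.Dict.get?_eq_none_iff_not_mem_keys p x).mpr h
  exact ⟨0, rfl, by simp [pvIsRoot, pvPD, this]⟩

lemma pvChain_mem {L : List String} {p : PySem.Dict String String} (hWF : pvWF L p)
    {x : String} (hx : x ∈ L) : ∀ n, pvChain p n x ∈ L := by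
  intro n; induction n generalizing x with
  | zero => exact hx
  | succ m ih => exact ih (hWF.2.1 x hx)

lemma pvRoot_mem {L : List String} {p : PySem.Dict String String} (hWF : pvWF L p)
    {x r : String} (hx : x ∈ L) (h : pvRoot p x r) : r ∈ L := by
  obtain ⟨n, hn, -⟩ := h
  exact hn ▸ pvChain_mem hWF hx n

lemma pvRoot_exists {L : List String} {p : PySem.Dict String String} (hWF : pvWF L p)
    (x : String) : ∃ r, pvRoot p x r := by
  by_cases hx : x ∈ L
  · exact hWF.2.2 x hx
  · exact ⟨x, pvRoot_not_mem (hWF.1 ▸ hx)⟩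

lemma pvSame_equiv {L : List String} {p : PySem.Dict String String} (hWF : pvWF L p) :
    Equivalence (pvSame p) := by
  constructor
  · intro x; obtain ⟨r, hr⟩ := pvRoot_exists hWF x; exact ⟨r, hr, hr⟩
  · rintro x y ⟨r, h1, h2⟩; exact ⟨r, h2, h1⟩
  · rintro x y z ⟨r, h1, h2⟩ ⟨s, h3, h4⟩
    rw [pvRoot_unique h2 h3] at h1
    exact ⟨s, h1, h4⟩

lemma pvRoot_min {p : PySem.Dict String String} {x r : String} (h : pvRoot p x r) :
    ∃ n, pvChain p n x = r ∧ (∀ k < n, pvChain p k x ≠ r) ∧ pvIsRoot p r := by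
  classical
  obtain ⟨n, hn, hr⟩ := h
  have hex : ∃ m, pvChain p m x = r := ⟨n, hn⟩
  exact ⟨Nat.find hex, Nat.find_spec hex, fun k hk => Nat.find_min hex hk, hr⟩

lemma pvDepth_lt {L : List String} {p : PySem.Dict String String} (hWF : pvWF L p)
    (hnd : L.Nodup) {x : String} (hx : x ∈ L) :
    ∃ d, d < L.length ∧ pvIsRoot p (pvChain p d x) := by
  classical
  obtain ⟨r₀, hr₀⟩ := hWF.2.2 x hx
  obtain ⟨n₀, hn₀, hrr⟩ := hr₀
  have hex : ∃ m, pvIsRoot p (pvChain p m x) := ⟨n₀, by rw [hn₀]; exact hrr⟩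
  set d := Nat.find hex with hd
  refine ⟨d, ?_, Nat.find_spec hex⟩
  -- injectivity of i ↦ chain i x on range (d+1)
  have hinj : Set.InjOn (fun i => pvChain p i x) (Finset.range (d+1)) := by
    intro i hi j hj hij
    simp only [Finset.coe_range, Set.mem_Iio] at hi hj
    by_contra hne
    rcases Nat.lt_or_ge i j with hlt | hge
    · -- chain i x = chain j x with i < j ≤ d : root reached earlier, contradiction
      have hstep : pvChain p (i + (d - j)) x = pvChain p (j + (d - j)) x := by
        rw [pvChain_add, pvChain_add]; exact congrArg _ hij
      have hjd : j + (d - j) = d := by omega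
      rw [hjd] at hstep
      have : pvIsRoot p (pvChain p (i + (d - j)) x) := by
        rw [hstep]; exact Nat.find_spec hex
      have hlt' : i + (d - j) < d := by omega
      exact absurd this (Nat.find_min hex hlt')
    · rcases Nat.lt_or_ge j i with hlt2 | hge2
      · have hstep : pvChain p (j + (d - i)) x = pvChain p (i + (d - i)) x := by
          rw [pvChain_add, pvChain_add]; exact congrArg _ hij.symm
        have hid : i + (d - i) = d := by omega
        rw [hid] at hstep
        have : pvIsRoot p (pvChain p (j + (d - i)) x) := by
          rw [hstep]; exact Nat.find_spec hex
        have hlt' : j + (d - i) < d := by omega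
        exact absurd this (Nat.find_min hex hlt')
      · omega
  have hmaps : ∀ i ∈ Finset.range (d+1), pvChain p i x ∈ L.toFinset := by
    intro i _; exact List.mem_toFinset.mpr (pvChain_mem hWF hx i)
  have hcard := Finset.card_le_card_of_injOn _ hmaps hinj
  rw [Finset.card_range, List.toFinset_card_of_nodup hnd] at hcard
  omega

-- ---------- Section find / union correctness ----------
lemma pvPD_insert (p : PySem.Dict String String) (k v z : String) :
    pvPD (p.insert k v) z = if z = k then v else pvPD p z := by
  unfold pvPD
  rw [PySem.Dict.get?_insert]
  split <;> rfl

lemma pvChain_insert_avoid {p : PySem.Dict String String} {z w : String} :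
    ∀ {n y}, (∀ k < n, pvChain p k y ≠ z) → pvChain (p.insert z w) n y = pvChain p n y := by
  intro n
  induction n with
  | zero => intro y _; rfl
  | succ m ih =>
    intro y h
    have hy : y ≠ z := by simpa using h 0 (Nat.succ_pos m)
    simp only [pvChain]
    rw [pvPD_insert, if_neg hy]
    exact ih (fun k hk => by simpa [pvChain] using h (k+1) (by omega))

lemma pvCompress {p : PySem.Dict String String} {x r : String} (h : pvRoot p x r) :
    ∀ y s, pvRoot (p.insert x r) y s ↔ pvRoot p y s := by
  have hpd : ∀ z, pvPD (p.insert x r) z = if z = x then r else pvPD p z :=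
    fun z => pvPD_insert p x r z
  have hroot' : ∀ s, pvIsRoot p s → pvIsRoot (p.insert x r) s := by
    intro s hs
    by_cases hsx : s = x
    · have hrs : r = s := pvRoot_unique h (by rw [hsx]; exact ⟨0, rfl, hsx ▸ hs⟩)
      unfold pvIsRoot
      rw [hpd, if_pos hsx]
      exact hrs
    · unfold pvIsRoot
      rw [hpd, if_neg hsx]
      exact hs
  have hrr : pvIsRoot (p.insert x r) r := hroot' r (pvRoot_isRoot h)
  intro y s
  constructor
  · rintro ⟨n, hn, hs⟩
    induction n generalizing y with
    | zero =>
      simp only [pvChain] at hn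
      subst hn
      by_cases hsx : y = x
      · have hry : r = y := by
          unfold pvIsRoot at hs
          rw [hpd, if_pos hsx] at hs
          exact hs
        have h2 := h
        rw [← hsx, hry] at h2
        exact h2
      · refine ⟨0, rfl, ?_⟩
        unfold pvIsRoot at hs ⊢
        rw [hpd, if_neg hsx] at hs
        exact hs
    | succ m ih =>
      simp only [pvChain] at hn
      by_cases hyx : y = x
      · rw [hpd, if_pos hyx] at hn
        rw [pvIsRoot_chain hrr] at hn
        have h2 := h
        rw [← hyx, hn] at h2
        exact h2
      · rw [hpd, if_neg hyx] at hn
        exact pvRoot_of_step (ih (pvPD p y) hn)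
  · rintro ⟨n, hn, hs⟩
    induction n generalizing y with
    | zero =>
      simp only [pvChain] at hn
      subst hn
      exact ⟨0, rfl, hroot' y hs⟩
    | succ m ih =>
      simp only [pvChain] at hn
      by_cases hyx : y = x
      · have hys : pvRoot p y s := ⟨m+1, by simp only [pvChain]; exact hn, hs⟩
        have hsr : s = r := by
          have h2 := h
          rw [← hyx] at h2
          exact pvRoot_unique hys h2
        refine ⟨1, ?_, hsr ▸ hrr⟩
        show pvPD (p.insert x r) y = s
        rw [hpd, if_pos hyx, hsr]
      · obtain ⟨k, hk, hks⟩ := ih (pvPD p y) hn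
        refine ⟨k+1, ?_, hks⟩
        simp only [pvChain]
        rw [hpd, if_neg hyx]
        exact hk

lemma pvCollapse {p : PySem.Dict String String} {rx ry : String}
    (hx : pvIsRoot p rx) (hy : pvIsRoot p ry) (hne : rx ≠ ry) :
    ∀ y s, pvRoot (p.insert ry rx) y s ↔
      ((pvRoot p y ry ∧ s = rx) ∨ (pvRoot p y s ∧ s ≠ ry)) := by
  have hpd : ∀ z, pvPD (p.insert ry rx) z = if z = ry then rx else pvPD p z :=
    fun z => pvPD_insert p ry rx z
  have hrx' : pvIsRoot (p.insert ry rx) rx := by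
    unfold pvIsRoot; rw [hpd, if_neg hne]; exact hx
  intro y s
  constructor
  · rintro ⟨n, hn, hs⟩
    induction n generalizing y with
    | zero =>
      simp only [pvChain] at hn
      subst hn
      by_cases hyr : y = ry
      · exfalso
        unfold pvIsRoot at hs
        rw [hpd, if_pos hyr] at hs
        exact hne (hs.trans hyr)
      · right
        refine ⟨⟨0, rfl, ?_⟩, hyr⟩
        unfold pvIsRoot at hs
        rw [hpd, if_neg hyr] at hs
        exact hs
    | succ m ih =>
      simp only [pvChain] at hn
      by_cases hyr : y = ry
      · rw [hpd, if_pos hyr] at hn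
        rcases ih rx hn with ⟨hrxry, hsrx⟩ | ⟨hrxs, hsne⟩
        · exact absurd (pvRoot_unique ⟨0, rfl, hx⟩ hrxry) hne
        · have hsrx : s = rx := pvRoot_unique hrxs ⟨0, rfl, hx⟩
          exact Or.inl ⟨by rw [hyr]; exact ⟨0, rfl, hy⟩, hsrx⟩
      · rw [hpd, if_neg hyr] at hn
        rcases ih (pvPD p y) hn with ⟨h1, h2⟩ | ⟨h1, h2⟩
        · exact Or.inl ⟨pvRoot_of_step h1, h2⟩
        · exact Or.inr ⟨pvRoot_of_step h1, h2⟩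
  · rintro (⟨hry, hs⟩ | ⟨hrs, hsne⟩)
    · subst hs
      obtain ⟨n, hn, hmin, -⟩ := pvRoot_min hry
      have havoid : ∀ k < n, pvChain p k y ≠ ry := hmin
      refine ⟨n+1, ?_, hrx'⟩
      rw [pvChain_succ_last, pvChain_insert_avoid havoid, hn, hpd, if_pos rfl]
    · obtain ⟨n, hn, hmin, -⟩ := pvRoot_min hrs
      have havoid : ∀ k < n, pvChain p k y ≠ ry := by
        intro k hk heq
        have h2 := pvChain_add p k (n - k) y
        rw [Nat.add_sub_cancel' (Nat.le_of_lt hk), hn, heq, pvIsRoot_chain hy] at h2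
        exact hsne h2
      refine ⟨n, ?_, ?_⟩
      · rw [pvChain_insert_avoid havoid, hn]
      · unfold pvIsRoot
        rw [hpd, if_neg hsne]
        exact pvRoot_isRoot hrs

lemma pvFindB_eq : ∀ (fuel : Nat) {d : Nat} {p : PySem.Dict String String} {x r : String},
    pvChain p d x = r → pvIsRoot p r → d < fuel → pvFindB fuel p x = r := by
  intro fuel
  induction fuel with
  | zero => intro d p x r _ _ h; omega
  | succ f ih =>
    intro d p x r hc hr hd
    simp only [pvFindB]
    cases hg : p.get? x with
    | none =>
      dsimp only
      have hpd : pvPD p x = x := by simp [pvPD, hg]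
      have hx : pvChain p d x = x := pvIsRoot_chain hpd d
      rw [hx] at hc
      exact hc
    | some px =>
      dsimp only
      by_cases hpx : px = x
      · rw [if_pos hpx]
        have hpd : pvPD p x = x := by simp [pvPD, hg, hpx]
        have hx : pvChain p d x = x := pvIsRoot_chain hpd d
        rw [hx] at hc
        exact hc
      · have hpd : pvPD p x = px := by simp [pvPD, hg]
        rw [if_neg hpx]
        cases d with
        | zero =>
          exfalso
          simp only [pvChain] at hc
          subst hc
          unfold pvIsRoot at hr
          rw [hpd] at hr
          exact hpx hr
        | succ e =>
          simp only [pvChain] at hc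
          rw [hpd] at hc
          exact ih hc hr (by omega)

lemma pvFindB_root {L : List String} {p : PySem.Dict String String} {x : String}
    (hWF : pvWF L p) (hnd : L.Nodup) (hx : x ∈ L) {fuel : Nat} (hfuel : L.length ≤ fuel) :
    pvRoot p x (pvFindB fuel p x) := by
  obtain ⟨d, hd, hroot⟩ := pvDepth_lt hWF hnd hx
  rw [pvFindB_eq fuel rfl hroot (by omega)]
  exact ⟨d, rfl, hroot⟩

lemma pvSize_eq {L : List String} {p : PySem.Dict String String} (hWF : pvWF L p) :
    p.size = L.length := by
  have : p.keys.length = L.length := by rw [hWF.1]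
  simpa [PySem.Dict.keys, PySem.Dict.size] using this

lemma pvFindA_spec {L : List String} (_hnd : L.Nodup) :
    ∀ (d : Nat) (p : PySem.Dict String String) (fuel : Nat) (x r : String),
    pvWF L p → x ∈ L → pvChain p d x = r → pvIsRoot p r → d < fuel →
    (pvFindA fuel p x).1 = r ∧ pvWF L (pvFindA fuel p x).2 ∧
      (∀ y s, pvRoot (pvFindA fuel p x).2 y s ↔ pvRoot p y s) := by
  intro d
  induction d with
  | zero =>
    intro p fuel x r hWF hx hc hr hd
    simp only [pvChain] at hc
    subst hc
    cases fuel with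
    | zero => omega
    | succ f =>
      simp only [pvFindA]
      cases hg : p.get? x with
      | none => exact ⟨rfl, hWF, fun y s => Iff.rfl⟩
      | some px =>
        dsimp only
        have hpd : pvPD p x = px := by simp [pvPD, hg]
        have hpxx : px = x := by unfold pvIsRoot at hr; rw [hpd] at hr; exact hr
        rw [if_pos hpxx]
        exact ⟨rfl, hWF, fun y s => Iff.rfl⟩
  | succ e ih =>
    intro p fuel x r hWF hx hc hr hd
    cases fuel with
    | zero => omega
    | succ f =>
      simp only [pvFindA]
      cases hg : p.get? x with
      | none =>
        dsimp only
        have hpd : pvPD p x = x := by simp [pvPD, hg]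
        have hst : pvChain p (e+1) x = x := pvIsRoot_chain hpd (e+1)
        rw [hst] at hc
        subst hc
        exact ⟨rfl, hWF, fun y s => Iff.rfl⟩
      | some px =>
        dsimp only
        have hpd : pvPD p x = px := by simp [pvPD, hg]
        by_cases hpx : px = x
        · rw [if_pos hpx]
          have hpd' : pvPD p x = x := hpx ▸ hpd
          have hst : pvChain p (e+1) x = x := pvIsRoot_chain hpd' (e+1)
          rw [hst] at hc
          subst hc
          exact ⟨rfl, hWF, fun y s => Iff.rfl⟩
        · rw [if_neg hpx]
          have hpxL : px ∈ L := hpd ▸ hWF.2.1 x hx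
          have hce : pvChain p e px = r := by
            simp only [pvChain] at hc
            rw [hpd] at hc
            exact hc
          obtain ⟨h1, h2, h3⟩ := ih p f px r hWF hpxL hce hr (by omega)
          set q := (pvFindA f p px).2 with hq
          have hrootq : pvRoot q x r := by
            rw [h3]
            exact ⟨e+1, hc, hr⟩
          have hcomp := pvCompress hrootq
          refine ⟨by simp [h1], ?_, ?_⟩
          · -- WF of q.insert x (pvFindA f p px).1
            rw [h1]
            have hkeys : (q.insert x r).keys = L := by
              rw [PySem.Dict.keys_insert_of_contains, h2.1]
              exact (PySem.Dict.contains_iff_mem_keys q x).mpr (h2.1 ▸ hx)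
            refine ⟨hkeys, ?_, ?_⟩
            · intro z hz
              rw [pvPD_insert]
              split
              · exact pvRoot_mem hWF hx ⟨e+1, hc, hr⟩
              · exact h2.2.1 z hz
            · intro z hz
              obtain ⟨s, hs⟩ := h2.2.2 z hz
              exact ⟨s, (hcomp z s).mpr hs⟩
          · intro y s
            rw [h1]
            rw [hcomp y s, h3 y s]

-- ---------- Section union-step semantics and the union fold ----------
def pvJoin (S : String → String → Prop) (a b x y : String) : Prop :=
  S x y ∨ (S x a ∧ S b y) ∨ (S x b ∧ S a y)

lemma pvSame_congr {p q : PySem.Dict String String}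
    (h : ∀ y s, pvRoot q y s ↔ pvRoot p y s) (x y : String) :
    pvSame q x y ↔ pvSame p x y := by
  unfold pvSame
  constructor
  · rintro ⟨r, h1, h2⟩; exact ⟨r, (h _ _).mp h1, (h _ _).mp h2⟩
  · rintro ⟨r, h1, h2⟩; exact ⟨r, (h _ _).mpr h1, (h _ _).mpr h2⟩

lemma pvJoin_congr {S T : String → String → Prop} (h : ∀ x y, S x y ↔ T x y) (a b x y : String) :
    pvJoin S a b x y ↔ pvJoin T a b x y := by
  unfold pvJoin
  rw [h, h, h, h, h]

lemma pvJoin_of_rel {S : String → String → Prop} (hE : Equivalence S) {a b : String}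
    (hab : S a b) (x y : String) : pvJoin S a b x y ↔ S x y := by
  unfold pvJoin
  constructor
  · rintro (h | ⟨h1, h2⟩ | ⟨h1, h2⟩)
    · exact h
    · exact hE.trans (hE.trans h1 hab) h2
    · exact hE.trans (hE.trans h1 (hE.symm hab)) h2
  · exact fun h => Or.inl h

lemma pvSame_collapse {L : List String} {p : PySem.Dict String String} {a b rx ry : String}
    (hWF : pvWF L p) (hra : pvRoot p a rx) (hrb : pvRoot p b ry) (hne : rx ≠ ry) :
    ∀ x y, pvSame (p.insert ry rx) x y ↔ pvJoin (pvSame p) a b x y := by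
  have hx : pvIsRoot p rx := pvRoot_isRoot hra
  have hy : pvIsRoot p ry := pvRoot_isRoot hrb
  have hcol := pvCollapse hx hy hne
  intro x y
  obtain ⟨u, hu⟩ := pvRoot_exists hWF x
  obtain ⟨v, hv⟩ := pvRoot_exists hWF y
  -- the root of z in p' is F (root of z in p)
  have hroot' : ∀ z w, pvRoot p z w → pvRoot (p.insert ry rx) z (if w = ry then rx else w) := by
    intro z w hw
    split
    · next hw' => exact (hcol z rx).mpr (Or.inl ⟨hw' ▸ hw, rfl⟩)
    · next hw' => exact (hcol z w).mpr (Or.inr ⟨hw, hw'⟩)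
  have hux := hroot' x u hu
  have hvy := hroot' y v hv
  constructor
  · rintro ⟨r, h1, h2⟩
    have e1 : r = if u = ry then rx else u := pvRoot_unique h1 hux
    have e2 : r = if v = ry then rx else v := pvRoot_unique h2 hvy
    -- case analysis on u, v
    by_cases hu' : u = ry <;> by_cases hv' : v = ry
    · -- u = v = ry : same in p
      exact Or.inl ⟨ry, hu' ▸ hu, hv' ▸ hv⟩
    · rw [if_pos hu'] at e1
      rw [if_neg hv'] at e2
      -- rx = v : x ~ b (root ry), y ~ a (root rx)
      have hvv : v = rx := by rw [← e1, e2]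
      right; right
      exact ⟨⟨ry, hu' ▸ hu, hrb⟩, ⟨rx, hra, hvv ▸ hv⟩⟩
    · rw [if_neg hu'] at e1
      rw [if_pos hv'] at e2
      have huu : u = rx := by rw [← e2, e1]
      right; left
      exact ⟨⟨rx, huu ▸ hu, hra⟩, ⟨ry, hrb, hv' ▸ hv⟩⟩
    · rw [if_neg hu'] at e1
      rw [if_neg hv'] at e2
      have : u = v := by rw [← e1, e2]
      exact Or.inl ⟨u, hu, this ▸ hv⟩
  · rintro (⟨r, h1, h2⟩ | ⟨⟨r, h1, h2⟩, ⟨t, h3, h4⟩⟩ | ⟨⟨r, h1, h2⟩, ⟨t, h3, h4⟩⟩)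
    · -- same root in p
      have : u = v := by
        rw [pvRoot_unique hu h1, pvRoot_unique hv h2]
      refine ⟨if u = ry then rx else u, hux, ?_⟩
      rw [this]; exact hvy
    · -- x ~ a, b ~ y : u = rx, v = ry
      have huu : u = rx := by rw [pvRoot_unique hu h1, pvRoot_unique hra h2]
      have hvv : v = ry := by rw [pvRoot_unique hv h4, pvRoot_unique hrb h3]
      refine ⟨rx, ?_, ?_⟩
      · have := hux; rw [huu, if_neg hne] at this; exact this
      · have := hvy; rw [hvv, if_pos rfl] at this; exact this
    · -- x ~ b, a ~ y : u = ry, v = rx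
      have huu : u = ry := by rw [pvRoot_unique hu h1, pvRoot_unique hrb h2]
      have hvv : v = rx := by rw [pvRoot_unique hv h4, pvRoot_unique hra h3]
      refine ⟨rx, ?_, ?_⟩
      · have := hux; rw [huu, if_pos rfl] at this; exact this
      · have := hvy; rw [hvv, if_neg hne] at this; exact this

lemma pvUnionA_spec {L : List String} (hnd : L.Nodup) {p : PySem.Dict String String} {a b : String}
    (hWF : pvWF L p) (ha : a ∈ L) (hb : b ∈ L) :
    pvWF L (pvUnionA p a b) ∧
      ∀ x y, (pvSame (pvUnionA p a b) x y ↔ pvJoin (pvSame p) a b x y) := by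
  unfold pvUnionA
  obtain ⟨d1, hd1, hr1⟩ := pvDepth_lt hWF hnd ha
  have hsz : p.size = L.length := pvSize_eq hWF
  obtain ⟨ha1, hWF1, hpres1⟩ :=
    pvFindA_spec hnd d1 p p.size a (pvChain p d1 a) hWF ha rfl hr1 (by omega)
  set ra := (pvFindA p.size p a).1 with hra_def
  set p1 := (pvFindA p.size p a).2 with hp1_def
  have hroota : pvRoot p a ra := by rw [ha1]; exact ⟨d1, rfl, hr1⟩
  obtain ⟨d2, hd2, hr2⟩ := pvDepth_lt hWF1 hnd hb
  have hsz1 : p1.size = L.length := pvSize_eq hWF1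
  obtain ⟨hb1, hWF2, hpres2⟩ :=
    pvFindA_spec hnd d2 p1 p1.size b (pvChain p1 d2 b) hWF1 hb rfl hr2 (by omega)
  set rb := (pvFindA p1.size p1 b).1 with hrb_def
  set p2 := (pvFindA p1.size p1 b).2 with hp2_def
  have hrootb1 : pvRoot p1 b rb := by rw [hb1]; exact ⟨d2, rfl, hr2⟩
  have hrootb : pvRoot p b rb := (hpres1 b rb).mp hrootb1
  have hpres12 : ∀ y s, pvRoot p2 y s ↔ pvRoot p y s :=
    fun y s => (hpres2 y s).trans (hpres1 y s)
  have hequiv : Equivalence (pvSame p) := pvSame_equiv hWF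
  by_cases hab : ra ≠ rb
  · rw [if_pos hab]
    have hroota2 : pvRoot p2 a ra := (hpres12 a ra).mpr hroota
    have hrootb2 : pvRoot p2 b rb := (hpres12 b rb).mpr hrootb
    have hcol := pvCollapse (pvRoot_isRoot hroota2) (pvRoot_isRoot hrootb2) hab
    constructor
    · -- WF
      refine ⟨?_, ?_, ?_⟩
      · rw [PySem.Dict.keys_insert_of_contains, hWF2.1]
        exact (PySem.Dict.contains_iff_mem_keys p2 rb).mpr
          (hWF2.1 ▸ pvRoot_mem hWF hb hrootb)
      · intro z hz
        rw [pvPD_insert]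
        split
        · exact pvRoot_mem hWF ha hroota
        · exact hWF2.2.1 z hz
      · intro z hz
        obtain ⟨s, hs⟩ := hWF2.2.2 z hz
        by_cases hsry : s = rb
        · exact ⟨ra, (hcol z ra).mpr (Or.inl ⟨hsry ▸ hs, rfl⟩)⟩
        · exact ⟨s, (hcol z s).mpr (Or.inr ⟨hs, hsry⟩)⟩
    · intro x y
      rw [pvSame_collapse hWF2 hroota2 hrootb2 hab x y]
      exact pvJoin_congr (fun x y => pvSame_congr hpres12 x y) a b x y
  · rw [if_neg hab]
    rw [not_not] at hab
    have hSab : pvSame p a b := ⟨ra, hroota, hab ▸ hrootb⟩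
    constructor
    · exact hWF2
    · intro x y
      rw [pvSame_congr hpres12 x y, pvJoin_of_rel hequiv hSab x y]

-- B's union step on a pair (the body of B's inner loop)
def pvStepB (p : PySem.Dict String String) (pr : String × String) : PySem.Dict String String :=
  let ra := pvFindB p.size p pr.1
  let rb := pvFindB p.size p pr.2
  if ra ≠ rb then p.insert rb ra else p

lemma pvStepB_spec {L : List String} (hnd : L.Nodup) {p : PySem.Dict String String} {a b : String}
    (hWF : pvWF L p) (ha : a ∈ L) (hb : b ∈ L) :
    pvWF L (pvStepB p (a, b)) ∧
      ∀ x y, (pvSame (pvStepB p (a, b)) x y ↔ pvJoin (pvSame p) a b x y) := by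
  unfold pvStepB
  have hsz : p.size = L.length := pvSize_eq hWF
  have hroota : pvRoot p a (pvFindB p.size p a) := pvFindB_root hWF hnd ha (by omega)
  have hrootb : pvRoot p b (pvFindB p.size p b) := pvFindB_root hWF hnd hb (by omega)
  set ra := pvFindB p.size p a
  set rb := pvFindB p.size p b
  have hequiv : Equivalence (pvSame p) := pvSame_equiv hWF
  by_cases hab : ra ≠ rb
  · rw [if_pos hab]
    have hcol := pvCollapse (pvRoot_isRoot hroota) (pvRoot_isRoot hrootb) hab
    constructor
    · refine ⟨?_, ?_, ?_⟩
      · rw [PySem.Dict.keys_insert_of_contains, hWF.1]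
        exact (PySem.Dict.contains_iff_mem_keys p rb).mpr (hWF.1 ▸ pvRoot_mem hWF hb hrootb)
      · intro z hz
        rw [pvPD_insert]
        split
        · exact pvRoot_mem hWF ha hroota
        · exact hWF.2.1 z hz
      · intro z hz
        obtain ⟨s, hs⟩ := hWF.2.2 z hz
        by_cases hsry : s = rb
        · exact ⟨ra, (hcol z ra).mpr (Or.inl ⟨hsry ▸ hs, rfl⟩)⟩
        · exact ⟨s, (hcol z s).mpr (Or.inr ⟨hs, hsry⟩)⟩
    · exact pvSame_collapse hWF hroota hrootb hab
  · rw [if_neg hab]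
    rw [not_not] at hab
    have hSab : pvSame p a b := ⟨ra, hroota, hab ▸ hrootb⟩
    exact ⟨hWF, fun x y => (pvJoin_of_rel hequiv hSab x y).symm⟩

lemma pvEqvGen_mono {α : Type} {R R' : α → α → Prop}
    (h : ∀ u v, R u v → Relation.EqvGen R' u v) {x y : α} :
    Relation.EqvGen R x y → Relation.EqvGen R' x y := by
  intro hxy
  induction hxy with
  | rel u v huv => exact h u v huv
  | refl u => exact Relation.EqvGen.refl u
  | symm u v _ ih => exact Relation.EqvGen.symm u v ih
  | trans u v w _ _ ih1 ih2 => exact Relation.EqvGen.trans u v w ih1 ih2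

lemma pvEqvGen_congr {α : Type} {R R' : α → α → Prop}
    (h1 : ∀ u v, R u v → Relation.EqvGen R' u v)
    (h2 : ∀ u v, R' u v → Relation.EqvGen R u v) (x y : α) :
    Relation.EqvGen R x y ↔ Relation.EqvGen R' x y :=
  ⟨pvEqvGen_mono h1, pvEqvGen_mono h2⟩

-- folding any union step with the pvJoin semantics over a list of pairs
-- computes the equivalence closure of (initial sameness ∪ the pairs)
lemma pvFoldUnion {L : List String} {step : PySem.Dict String String → String × String → PySem.Dict String String}
    (hstep : ∀ p a b, pvWF L p → a ∈ L → b ∈ L →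
      pvWF L (step p (a, b)) ∧ ∀ x y, (pvSame (step p (a, b)) x y ↔ pvJoin (pvSame p) a b x y)) :
    ∀ (ps : List (String × String)) (p : PySem.Dict String String), pvWF L p →
      (∀ pr ∈ ps, pr.1 ∈ L ∧ pr.2 ∈ L) →
      pvWF L (ps.foldl step p) ∧
        ∀ x y, (pvSame (ps.foldl step p) x y ↔
          Relation.EqvGen (fun u v => pvSame p u v ∨ (u, v) ∈ ps) x y) := by
  intro ps
  induction ps with
  | nil =>
    intro p hWF _
    refine ⟨hWF, fun x y => ?_⟩
    rw [Equivalence.eqvGen_iff]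
    · simp
    · constructor
      · intro x; exact Or.inl ((pvSame_equiv hWF).refl x)
      · rintro x y (h | h)
        · exact Or.inl ((pvSame_equiv hWF).symm h)
        · exact absurd h (by simp)
      · rintro x y z (h1 | h1) (h2 | h2)
        · exact Or.inl ((pvSame_equiv hWF).trans h1 h2)
        · exact absurd h2 (by simp)
        · exact absurd h1 (by simp)
        · exact absurd h1 (by simp)
  | cons pr ps ih =>
    intro p hWF hmem
    obtain ⟨ha, hb⟩ := hmem pr List.mem_cons_self
    obtain ⟨hWF1, hsame1⟩ := hstep p pr.1 pr.2 hWF ha hb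
    have hpr : step p pr = step p (pr.1, pr.2) := by rfl
    simp only [List.foldl_cons]
    rw [hpr]
    obtain ⟨hWF2, hsame2⟩ := ih (step p (pr.1, pr.2)) hWF1 (fun q hq => hmem q (List.mem_cons_of_mem _ hq))
    refine ⟨hWF2, fun x y => ?_⟩
    rw [hsame2 x y]
    apply pvEqvGen_congr
    · rintro u v (h | h)
      · rw [hsame1 u v] at h
        rcases h with h | ⟨h1, h2⟩ | ⟨h1, h2⟩
        · exact Relation.EqvGen.rel u v (Or.inl h)
        · refine Relation.EqvGen.trans u pr.1 v (Relation.EqvGen.rel u pr.1 (Or.inl h1)) ?_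
          refine Relation.EqvGen.trans pr.1 pr.2 v
            (Relation.EqvGen.rel pr.1 pr.2 (Or.inr (by simp))) ?_
          exact Relation.EqvGen.rel pr.2 v (Or.inl h2)
        · refine Relation.EqvGen.trans u pr.2 v (Relation.EqvGen.rel u pr.2 (Or.inl h1)) ?_
          refine Relation.EqvGen.trans pr.2 pr.1 v
            (Relation.EqvGen.symm pr.1 pr.2 (Relation.EqvGen.rel pr.1 pr.2 (Or.inr (by simp)))) ?_
          exact Relation.EqvGen.rel pr.1 v (Or.inl h2)
      · exact Relation.EqvGen.rel u v (Or.inr (List.mem_cons_of_mem _ h))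
    · rintro u v (h | h)
      · refine Relation.EqvGen.rel u v (Or.inl ?_)
        rw [hsame1 u v]
        exact Or.inl h
      · rcases List.mem_cons.mp h with h | h
        · refine Relation.EqvGen.rel u v (Or.inl ?_)
          rw [hsame1 u v]
          right; left
          have hE := pvSame_equiv hWF
          have e1 : pr.1 = u := by rw [← h]
          have e2 : pr.2 = v := by rw [← h]
          exact ⟨e1 ▸ hE.refl u, e2 ▸ hE.refl v⟩
        · exact Relation.EqvGen.rel u v (Or.inr h)

-- ---------- Section pair lists and loop conversions ----------
abbrev pvCond (tw : PySem.Dict String (PySem.Set String)) (a b : String) : Prop :=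
  PySem.Set.inter (tw.getD a PySem.Set.empty) (tw.getD b PySem.Set.empty) ≠ []

def pvPairsOf : List String → List (String × String)
  | [] => []
  | x :: xs => (xs.map (fun y => (x, y))) ++ pvPairsOf xs

def pvPairsA (tw : PySem.Dict String (PySem.Set String)) (L : List String) :
    List (String × String) :=
  (pvPairsOf L).filter (fun pr => decide (pvCond tw pr.1 pr.2))

def pvPairsB (vals : List (List String)) : List (String × String) :=
  vals.flatMap (fun teams => match teams with
    | [] => []
    | t0 :: rest => rest.map (fun t => (t0, t)))

lemma pvFoldl_if_filter {α β : Type} (c : β → Prop) [DecidablePred c] (f : α → β → α) :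
    ∀ (l : List β) (a : α),
      l.foldl (fun acc x => if c x then f acc x else acc) a =
        (l.filter (fun x => decide (c x))).foldl f a := by
  intro l
  induction l with
  | nil => intro a; rfl
  | cons x xs ih =>
    intro a
    simp only [List.foldl_cons, List.filter_cons]
    by_cases hc : c x
    · rw [if_pos hc, ih]
      simp [hc]
    · rw [if_neg hc, ih]
      simp [hc]

lemma mem_pvPairsOf_mem {l : List String} {pr : String × String} (h : pr ∈ pvPairsOf l) :
    pr.1 ∈ l ∧ pr.2 ∈ l := by
  induction l with
  | nil => simp [pvPairsOf] at h
  | cons x xs ih =>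
    simp only [pvPairsOf, List.mem_append] at h
    rcases h with h | h
    · obtain ⟨y, hy, hpy⟩ := List.mem_map.mp h
      subst hpy
      exact ⟨List.mem_cons_self, List.mem_cons_of_mem _ hy⟩
    · obtain ⟨h1, h2⟩ := ih h
      exact ⟨List.mem_cons_of_mem _ h1, List.mem_cons_of_mem _ h2⟩

lemma pvPairsOf_of_filter {α : Type} (c : String × α → Bool) :
    ∀ (l : List (String × α)) {t0 t : String} {rest : List String},
      ((l.filter c).map Prod.fst) = t0 :: rest → t ∈ rest →
      (t0, t) ∈ pvPairsOf (l.map Prod.fst) := by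
  intro l
  induction l with
  | nil => intro t0 t rest h _; simp at h
  | cons kv l' ih =>
    intro t0 t rest h ht
    rw [List.filter_cons] at h
    by_cases hc : c kv = true
    · rw [if_pos hc] at h
      simp only [List.map_cons, List.cons.injEq] at h
      obtain ⟨h1, h2⟩ := h
      -- t ∈ rest = (filter c l').map fst ⊆ l'.map fst
      have htl : t ∈ l'.map Prod.fst := by
        rw [← h2] at ht
        obtain ⟨p, hp, hpt⟩ := List.mem_map.mp ht
        exact List.mem_map.mpr ⟨p, List.mem_of_mem_filter hp, hpt⟩
      simp only [List.map_cons, pvPairsOf, List.mem_append]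
      left
      rw [h1]
      exact List.mem_map.mpr ⟨t, htl, rfl⟩
    · rw [if_neg (by simpa using hc)] at h
      simp only [List.map_cons, pvPairsOf, List.mem_append]
      right
      exact ih h ht

lemma pvEnumSliceFold {α : Type} (L : List String) (g : α → String → String → α) :
    ∀ (M : List String) (s : Nat) (p : α), L.drop s = M →
      (PySem.List.enumerate M (s : Int)).foldl (fun p it =>
        (PySem.List.slice L (some (it.1 + 1)) none).foldl (fun p t2 => g p it.2 t2) p) p =
      (pvPairsOf M).foldl (fun p pr => g p pr.1 pr.2) p := by
  intro M
  induction M with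
  | nil => intro s p _; rfl
  | cons x xs ih =>
    intro s p hs
    rw [PySem.List.enumerate_cons]
    simp only [List.foldl_cons]
    have hcast : (s : Int) + 1 = ((s + 1 : Nat) : Int) := by push_cast; ring
    have hslice : PySem.List.slice L (some ((s : Int) + 1)) none = xs := by
      rw [hcast, PySem.List.slice_from_natCast]
      have : List.drop (s + 1) L = List.drop 1 (List.drop s L) := by
        rw [List.drop_drop]
      rw [this, hs]
      rfl
    rw [hslice]
    have hdrop : L.drop (s + 1) = xs := by
      have : List.drop (s + 1) L = List.drop 1 (List.drop s L) := by rw [List.drop_drop]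
      rw [this, hs]; rfl
    rw [hcast]
    rw [ih (s + 1) _ hdrop]
    show (pvPairsOf xs).foldl (fun p pr => g p pr.1 pr.2) (xs.foldl (fun p t2 => g p x t2) p) =
      (pvPairsOf (x :: xs)).foldl (fun p pr => g p pr.1 pr.2) p
    simp only [pvPairsOf, List.foldl_append]
    rw [List.foldl_map]

lemma pvPairsB_fold {α : Type} (step : α → String × String → α) (vals : List (List String)) (p : α) :
    (pvPairsB vals).foldl step p =
      vals.foldl (fun p teams => match teams with
        | [] => p
        | t0 :: rest => rest.foldl (fun p t => step p (t0, t)) p) p := by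
  unfold pvPairsB
  rw [List.foldl_flatMap]
  congr 1
  funext p' teams
  cases teams with
  | nil => rfl
  | cons t0 rest => exact List.foldl_map

lemma pvSetdefault_insert {ν : Type} (d : PySem.Dict String ν) (k : String) (v0 : ν) (f : ν → ν) :
    (d.setdefault k v0).insert k (f ((d.setdefault k v0).getD k v0)) = d.modify k v0 f := by
  by_cases hc : d.contains k = true
  · rw [PySem.Dict.setdefault_of_contains _ _ hc]
    rfl
  · rw [PySem.Dict.setdefault_of_not_contains _ _ (by simpa using hc)]
    have h1 : (d.insert k v0).getD k v0 = v0 := by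
      rw [PySem.Dict.getD_eq_get?_getD, PySem.Dict.get?_insert_self]
      rfl
    rw [h1, PySem.Dict.insert_insert_self]
    unfold PySem.Dict.modify
    rw [PySem.Dict.getD_of_not_contains _ _ (by simpa using hc)]

-- ---------- Section wt characterization / parent0 / collect invariants ----------
def pvFlat (tw : PySem.Dict String (PySem.Set String)) : List (String × String) :=
  tw.items.flatMap (fun tws => tws.2.map (fun w => (w, tws.1)))

def pvWtOf (tw : PySem.Dict String (PySem.Set String)) : PySem.Dict String (List String) :=
  (pvFlat tw).foldl (fun d p => d.modify p.1 [] (· ++ [p.2])) (PySem.Dict.mk [])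

lemma pvWt_modify (tw : PySem.Dict String (PySem.Set String)) :
    tw.items.foldl (fun wt tws =>
      tws.2.foldl (fun (wt : PySem.Dict String (List String)) w =>
        (wt.setdefault w []).insert w ((wt.setdefault w []).getD w [] ++ [tws.1])) wt)
      (PySem.Dict.mk []) = pvWtOf tw := by
  unfold pvWtOf pvFlat
  rw [List.foldl_flatMap]
  congr 1
  funext d tws
  rw [List.foldl_map]
  congr 1
  funext wt w
  show (wt.setdefault w []).insert w ((wt.setdefault w []).getD w [] ++ [tws.1]) =
    wt.modify w [] (· ++ [tws.1])
  exact pvSetdefault_insert wt w [] (· ++ [tws.1])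

lemma pvFilter_map_single {w tname : String} :
    ∀ (ws : List String), ws.Nodup →
      ((ws.map (fun w' => (w', tname))).filter (fun p => p.1 == w)).map Prod.snd =
        if w ∈ ws then [tname] else [] := by
  intro ws
  induction ws with
  | nil => intro _; simp
  | cons w' ws' ih =>
    intro hnd
    obtain ⟨hnotin, hnd'⟩ := List.nodup_cons.mp hnd
    simp only [List.map_cons, List.filter_cons]
    by_cases hw : w' = w
    · rw [if_pos (by simpa using hw)]
      rw [List.map_cons, ih hnd']
      rw [if_neg (hw ▸ hnotin), if_pos (by simp [← hw])]
    · rw [if_neg (by simpa using hw), ih hnd']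
      by_cases hm : w ∈ ws'
      · rw [if_pos hm, if_pos (List.mem_cons_of_mem _ hm)]
      · rw [if_neg hm, if_neg (by simp only [List.mem_cons]; rintro (h | h); exacts [hw h.symm, hm h])]

lemma pvFlatFilter (w : String) :
    ∀ (l : List (String × PySem.Set String)), (∀ q ∈ l, List.Nodup q.2) →
      ((l.flatMap (fun tws => tws.2.map (fun w' => (w', tws.1)))).filter
          (fun p => p.1 == w)).map Prod.snd =
        (l.filter (fun tws => decide (w ∈ tws.2))).map Prod.fst := by
  intro l
  induction l with
  | nil => intro _; simp
  | cons tws l ih =>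
    intro hvals
    have hvtws : tws.2.Nodup := hvals tws List.mem_cons_self
    have hvl : ∀ q ∈ l, List.Nodup q.2 := fun q hq => hvals q (List.mem_cons_of_mem _ hq)
    simp only [List.flatMap_cons, List.filter_append, List.map_append, List.filter_cons]
    rw [ih hvl, pvFilter_map_single tws.2 hvtws]
    by_cases hw : w ∈ tws.2
    · rw [if_pos hw]
      simp only [hw, decide_true, if_pos]
      rfl
    · rw [if_neg hw]
      simp only [hw, decide_false]
      rw [if_neg (by simp)]
      rfl

lemma pvTeams_eq (tw : PySem.Dict String (PySem.Set String))
    (hvals : ∀ tws ∈ tw.items, List.Nodup tws.2) (w : String) :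
    (pvWtOf tw).getD w [] =
      (tw.items.filter (fun tws => decide (w ∈ tws.2))).map Prod.fst := by
  unfold pvWtOf
  rw [PySem.Dict.getD_foldl_modify_append]
  have hempty : (PySem.Dict.mk [] : PySem.Dict String (List String)).getD w [] = [] := rfl
  rw [hempty, List.nil_append]
  unfold pvFlat
  exact pvFlatFilter w tw.items hvals

lemma pvMem_teams {tw : PySem.Dict String (PySem.Set String)} {w t : String}
    (hvals : ∀ tws ∈ tw.items, List.Nodup tws.2) :
    t ∈ (pvWtOf tw).getD w [] ↔ ∃ ws, (t, ws) ∈ tw.items ∧ w ∈ ws := by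
  rw [pvTeams_eq tw hvals w]
  simp only [List.mem_map, List.mem_filter]
  constructor
  · rintro ⟨p, ⟨hp, hw⟩, hpt⟩
    exact ⟨p.2, by rw [← hpt]; exact hp, by simpa using hw⟩
  · rintro ⟨ws, hmem, hw⟩
    exact ⟨(t, ws), ⟨hmem, by simpa using hw⟩, rfl⟩

lemma pvWt_keys_nodup (tw : PySem.Dict String (PySem.Set String)) :
    (pvWtOf tw).keys.Nodup := by
  unfold pvWtOf
  exact PySem.Dict.nodup_keys_foldl_modify_key (pvFlat tw) Prod.fst []
    (fun d p => (· ++ [p.2])) (PySem.Dict.mk []) (by simp [PySem.Dict.keys])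

-- parent0 = {t: t for t in L}
lemma pvParent0_get? : ∀ (L : List String) (d : PySem.Dict String String) (k : String),
    (L.foldl (fun p t => p.insert t t) d).get? k = if k ∈ L then some k else d.get? k := by
  intro L
  induction L with
  | nil => intro d k; simp
  | cons t L' ih =>
    intro d k
    simp only [List.foldl_cons]
    rw [ih]
    rw [PySem.Dict.get?_insert]
    by_cases h1 : k ∈ L'
    · rw [if_pos h1, if_pos (List.mem_cons_of_mem _ h1)]
    · rw [if_neg h1]
      by_cases h2 : k = t
      · rw [if_pos h2, if_pos (by simp [h2]), h2]
      · rw [if_neg h2, if_neg (by simp [List.mem_cons, h1, h2])]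

lemma pvSet_update_append : ∀ (L : List String) (s : List String), (s ++ L).Nodup →
    PySem.Set.update s L = s ++ L := by
  intro L
  induction L with
  | nil => intro s _; simp [PySem.Set.update]
  | cons x L' ih =>
    intro s hnd
    show PySem.Set.update (PySem.Set.add s x) L' = s ++ x :: L'
    have hxs : x ∉ s := by
      intro hx
      have := List.Nodup.sublist (List.Sublist.append_left ((List.nil_sublist L').cons₂ x) s) hnd
      rw [List.nodup_append] at this
      have h3 := this.2.2
      simp at h3
      exact h3 x hx rfl
    have hadd : PySem.Set.add s x = s ++ [x] := by
      unfold PySem.Set.add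
      rw [if_neg (by simpa using hxs)]
    rw [hadd]
    have := ih (s ++ [x]) (by simpa using hnd)
    rw [this]
    simp

lemma pvParent0_spec {L : List String} (hnd : L.Nodup) :
    pvWF L (L.foldl (fun p t => p.insert t t) (PySem.Dict.mk [])) ∧
      (∀ x y, pvSame (L.foldl (fun p t => p.insert t t) (PySem.Dict.mk [])) x y ↔ x = y) := by
  set p0 := L.foldl (fun p t => p.insert t t) (PySem.Dict.mk []) with hp0
  have hget : ∀ k, p0.get? k = if k ∈ L then some k else none := by
    intro k
    rw [hp0, pvParent0_get? L (PySem.Dict.mk []) k]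
    rfl
  have hpd : ∀ x, pvPD p0 x = x := by
    intro x
    unfold pvPD
    rw [hget]
    split <;> rfl
  have hroot : ∀ x r, pvRoot p0 x r ↔ r = x := by
    intro x r
    constructor
    · rintro ⟨n, hn, -⟩
      rw [pvIsRoot_chain (hpd x) n] at hn
      exact hn.symm
    · rintro rfl
      exact ⟨0, rfl, hpd r⟩
  have hkeys : p0.keys = L := by
    rw [hp0]
    rw [PySem.Dict.keys_foldl_insert]
    have : (PySem.Dict.mk [] : PySem.Dict String String).keys = [] := rfl
    rw [this]
    have h2 := pvSet_update_append L [] (by simpa using hnd)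
    rw [List.nil_append] at h2
    exact h2
  refine ⟨⟨hkeys, fun x hx => by rw [hpd]; exact hx, fun x hx => ⟨x, (hroot x x).mpr rfl⟩⟩, ?_⟩
  intro x y
  constructor
  · rintro ⟨r, h1, h2⟩
    rw [hroot] at h1 h2
    rw [← h1, ← h2]
  · rintro rfl
    exact ⟨x, (hroot x x).mpr rfl, (hroot x x).mpr rfl⟩

-- invariants of the collect phase
lemma pvCollect_inv (records : List (List (String × String))) :
    (pvCollectA records).1.keys.Nodup ∧
      (∀ tws ∈ (pvCollectA records).1.items, List.Nodup tws.2) := by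
  unfold pvCollectA
  suffices h : ∀ (tp : PySem.Dict String (PySem.Set String) ×
      PySem.Dict String (List (List (String × String)))),
      tp.1.keys.Nodup → (∀ tws ∈ tp.1.items, List.Nodup tws.2) →
      (records.foldl (fun tp record =>
        let team := pvRecGetD record "team" ""
        let weapon := pvRecGetD record "weapon" ""
        if team ≠ "" ∧ weapon ≠ "" then
          (tp.1.modify team PySem.Set.empty (fun s => PySem.Set.add s weapon),
           tp.2.modify team [] (fun l => l ++ [record]))
        else tp) tp).1.keys.Nodup ∧
      (∀ tws ∈ (records.foldl (fun tp record =>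
        let team := pvRecGetD record "team" ""
        let weapon := pvRecGetD record "weapon" ""
        if team ≠ "" ∧ weapon ≠ "" then
          (tp.1.modify team PySem.Set.empty (fun s => PySem.Set.add s weapon),
           tp.2.modify team [] (fun l => l ++ [record]))
        else tp) tp).1.items, List.Nodup tws.2) by
    exact h (PySem.Dict.mk [], PySem.Dict.mk []) (by simp [PySem.Dict.keys]) (by simp)
  induction records with
  | nil => intro tp h1 h2; exact ⟨h1, h2⟩
  | cons record rs ih =>
    intro tp h1 h2
    simp only [List.foldl_cons]
    set team := pvRecGetD record "team" ""
    set weapon := pvRecGetD record "weapon" ""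
    by_cases hc : team ≠ "" ∧ weapon ≠ ""
    · rw [if_pos hc]
      apply ih
      · exact PySem.Dict.nodup_keys_insert _ _ _ h1
      · -- items of the modify
        intro tws htws
        show List.Nodup tws.2
        unfold PySem.Dict.modify at htws
        rw [PySem.Dict.items_insert] at htws
        by_cases hcon : tp.1.contains team = true
        · rw [if_pos hcon] at htws
          obtain ⟨q, hq, hqe⟩ := List.mem_map.mp htws
          by_cases hqt : (q.1 == team) = true
          · rw [if_pos hqt] at hqe
            rw [← hqe]
            -- value is add of getD
            have hv : tp.1.getD team PySem.Set.empty = q.2 := by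
              have : (team, q.2) ∈ tp.1.items := by
                have : q.1 = team := by simpa using hqt
                rw [← this]
                exact hq
              exact PySem.Dict.getD_of_mem_items _ this h1 _
            show ((tp.1.getD team PySem.Set.empty).add weapon).Nodup
            rw [hv]
            exact PySem.Set.nodup_add _ _ (h2 q hq)
          · rw [if_neg hqt] at hqe
            rw [← hqe]
            exact h2 q hq
        · rw [if_neg hcon] at htws
          rcases List.mem_append.mp htws with hq | hq
          · exact h2 tws hq
          · have : tws = (team, (tp.1.getD team PySem.Set.empty).add weapon) := by simpa using hq
            rw [this]
            have hg : tp.1.getD team PySem.Set.empty = PySem.Set.empty :=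
              PySem.Dict.getD_of_not_contains _ _ (by simpa using hcon)
            show ((tp.1.getD team PySem.Set.empty).add weapon).Nodup
            rw [hg]
            exact PySem.Set.nodup_add _ _ (by simp [PySem.Set.empty])
    · rw [if_neg hc]
      exact ih tp h1 h2

-- ---------- Section closure equality of the two pair lists ----------
lemma pvGet_item {tw : PySem.Dict String (PySem.Set String)} (_hnd : tw.keys.Nodup)
    {a : String} (ha : a ∈ tw.keys) : (a, tw.getD a PySem.Set.empty) ∈ tw.items := by
  cases hg : tw.get? a with
  | none =>
    rw [PySem.Dict.get?_eq_none_iff_not_mem_keys] at hg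
    exact absurd ha hg
  | some v =>
    have hmem := PySem.Dict.mem_items_of_get?_eq_some _ hg
    have : tw.getD a PySem.Set.empty = v := by
      rw [PySem.Dict.getD_eq_get?_getD, hg]
      rfl
    rw [this]
    exact hmem

lemma pvCond_shared {tw : PySem.Dict String (PySem.Set String)} {a b : String} :
    pvCond tw a b ↔
      ∃ w, w ∈ tw.getD a PySem.Set.empty ∧ w ∈ tw.getD b PySem.Set.empty := by
  unfold pvCond PySem.Set.inter
  constructor
  · intro h
    obtain ⟨w, hw⟩ := List.exists_mem_of_ne_nil _ h
    rw [List.mem_filter] at hw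
    exact ⟨w, hw.1, by simpa using hw.2⟩
  · rintro ⟨w, h1, h2⟩
    exact List.ne_nil_of_mem (List.mem_filter.mpr ⟨h1, by simpa using h2⟩)

lemma pvTeams_mem_values {tw : PySem.Dict String (PySem.Set String)} {w : String}
    {teams : List String} (h : (pvWtOf tw).getD w [] = teams) (hne : teams ≠ []) :
    teams ∈ (pvWtOf tw).values := by
  rw [PySem.Dict.getD_eq_get?_getD] at h
  cases hg : (pvWtOf tw).get? w with
  | none => rw [hg] at h; exact absurd h.symm hne
  | some v =>
    rw [hg] at h
    have hv : v = teams := h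
    have hmem := PySem.Dict.mem_items_of_get?_eq_some _ hg
    show teams ∈ (pvWtOf tw).items.map (fun x => x.2)
    exact List.mem_map.mpr ⟨(w, v), hmem, hv⟩

lemma pvPairsB_mem_of {vals : List (List String)} {t0 t : String} {rest teams : List String}
    (hteams : teams ∈ vals) (hshape : teams = t0 :: rest) (ht : t ∈ rest) :
    (t0, t) ∈ pvPairsB vals := by
  unfold pvPairsB
  rw [List.mem_flatMap]
  refine ⟨teams, hteams, ?_⟩
  rw [hshape]
  exact List.mem_map.mpr ⟨t, ht, rfl⟩

lemma pvPairsB_elim {vals : List (List String)} {pr : String × String}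
    (h : pr ∈ pvPairsB vals) :
    ∃ teams ∈ vals, ∃ rest, teams = pr.1 :: rest ∧ pr.2 ∈ rest := by
  unfold pvPairsB at h
  rw [List.mem_flatMap] at h
  obtain ⟨teams, hteams, hpr⟩ := h
  cases teams with
  | nil => simp at hpr
  | cons t0 rest =>
    obtain ⟨t, ht, hte⟩ := List.mem_map.mp hpr
    refine ⟨t0 :: rest, hteams, rest, ?_, ?_⟩
    · rw [← hte]
    · rw [← hte]
      exact ht

lemma pvClosure (tw : PySem.Dict String (PySem.Set String)) (hnd : tw.keys.Nodup)
    (hvals : ∀ tws ∈ tw.items, List.Nodup tws.2) :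
    ∀ x y, Relation.EqvGen (fun u v => u = v ∨ (u, v) ∈ pvPairsA tw tw.keys) x y ↔
           Relation.EqvGen (fun u v => u = v ∨ (u, v) ∈ pvPairsB (pvWtOf tw).values) x y := by
  apply pvEqvGen_congr
  · rintro u v (h | h)
    · exact h ▸ Relation.EqvGen.refl u
    · unfold pvPairsA at h
      rw [List.mem_filter] at h
      obtain ⟨hpairs, hcond⟩ := h
      have hcond' : pvCond tw u v := of_decide_eq_true hcond
      obtain ⟨huL, hvL⟩ := mem_pvPairsOf_mem hpairs
      obtain ⟨w, hwu, hwv⟩ := pvCond_shared.mp hcond'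
      have hu : u ∈ (pvWtOf tw).getD w [] :=
        (pvMem_teams hvals).mpr ⟨_, pvGet_item hnd huL, hwu⟩
      have hv : v ∈ (pvWtOf tw).getD w [] :=
        (pvMem_teams hvals).mpr ⟨_, pvGet_item hnd hvL, hwv⟩
      cases hT : (pvWtOf tw).getD w [] with
      | nil => rw [hT] at hu; exact absurd hu (by simp)
      | cons t0 rest =>
        have hmemvals : (t0 :: rest) ∈ (pvWtOf tw).values :=
          pvTeams_mem_values hT (by simp)
        have conn : ∀ z ∈ t0 :: rest,
            Relation.EqvGen (fun u v => u = v ∨ (u, v) ∈ pvPairsB (pvWtOf tw).values) t0 z := by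
          intro z hz
          rcases List.mem_cons.mp hz with hz | hz
          · rw [hz]
            exact Relation.EqvGen.refl t0
          · exact Relation.EqvGen.rel _ _ (Or.inr (pvPairsB_mem_of hmemvals rfl hz))
        rw [hT] at hu hv
        exact Relation.EqvGen.trans _ _ _
          (Relation.EqvGen.symm _ _ (conn u hu)) (conn v hv)
  · rintro u v (h | h)
    · exact h ▸ Relation.EqvGen.refl u
    · obtain ⟨teams, hteams, rest, hshape, ht⟩ := pvPairsB_elim h
      have hex : ∃ w, (pvWtOf tw).getD w [] = teams := by
        obtain ⟨p, hp, hpe⟩ := List.mem_map.mp hteams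
        refine ⟨p.1, ?_⟩
        rw [PySem.Dict.getD_of_mem_items _ (by exact hp) (pvWt_keys_nodup tw) []]
        exact hpe
      obtain ⟨w, hw⟩ := hex
      have hu : u ∈ (pvWtOf tw).getD w [] := by rw [hw, hshape]; exact List.mem_cons_self
      have hv : v ∈ (pvWtOf tw).getD w [] := by
        rw [hw, hshape]; exact List.mem_cons_of_mem _ ht
      have hwfilter : ((tw.items.filter (fun tws => decide (w ∈ tws.2))).map Prod.fst) =
          u :: rest := by
        rw [← pvTeams_eq tw hvals w, hw, hshape]
      have hpair : (u, v) ∈ pvPairsOf (tw.items.map Prod.fst) :=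
        pvPairsOf_of_filter _ tw.items hwfilter ht
      have hcond : pvCond tw u v := by
        rw [pvCond_shared]
        obtain ⟨ws1, hm1, hw1⟩ := (pvMem_teams hvals).mp hu
        obtain ⟨ws2, hm2, hw2⟩ := (pvMem_teams hvals).mp hv
        refine ⟨w, ?_, ?_⟩
        · rw [PySem.Dict.getD_of_mem_items _ hm1 hnd]; exact hw1
        · rw [PySem.Dict.getD_of_mem_items _ hm2 hnd]; exact hw2
      refine Relation.EqvGen.rel u v (Or.inr ?_)
      unfold pvPairsA
      rw [List.mem_filter]
      exact ⟨hpair, decide_eq_true hcond⟩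

-- ---------- Section grouping phase ----------
lemma pvGroupA {L : List String} (hnd : L.Nodup) (pA : PySem.Dict String String)
    (hWFA : pvWF L pA) :
    ∀ (M : List String) (g : PySem.Dict String (List String)) (p : PySem.Dict String String),
      pvWF L p → (∀ y s, pvRoot p y s ↔ pvRoot pA y s) → (∀ t ∈ M, t ∈ L) →
      (M.foldl (fun (gp : PySem.Dict String (List String) × PySem.Dict String String) team =>
          (gp.1.modify (pvFindA gp.2.size gp.2 team).1 [] (fun l => l ++ [team]),
            (pvFindA gp.2.size gp.2 team).2)) (g, p)).1 =
        M.foldl (fun g t => g.modify (pvFindB L.length pA t) [] (fun l => l ++ [t])) g := by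
  intro M
  induction M with
  | nil => intro g p _ _ _; rfl
  | cons team M' ih =>
    intro g p hWF hpres hmem
    have hteam : team ∈ L := hmem team List.mem_cons_self
    have hsz : p.size = L.length := pvSize_eq hWF
    obtain ⟨d, hd, hroot⟩ := pvDepth_lt hWF hnd hteam
    obtain ⟨h1, h2, h3⟩ :=
      pvFindA_spec hnd d p p.size team (pvChain p d team) hWF hteam rfl hroot (by omega)
    have hrootp : pvRoot p team (pvFindA p.size p team).1 := by
      rw [h1]; exact ⟨d, rfl, hroot⟩
    have hrootA : pvRoot pA team (pvFindA p.size p team).1 := (hpres team _).mp hrootp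
    have hrootB : pvRoot pA team (pvFindB L.length pA team) :=
      pvFindB_root hWFA hnd hteam (le_refl _)
    have heq : (pvFindA p.size p team).1 = pvFindB L.length pA team :=
      pvRoot_unique hrootA hrootB
    simp only [List.foldl_cons]
    rw [ih (g.modify (pvFindA p.size p team).1 [] (fun l => l ++ [team]))
        (pvFindA p.size p team).2 h2
        (fun y s => (h3 y s).trans (hpres y s))
        (fun t ht => hmem t (List.mem_cons_of_mem _ ht))]
    rw [heq]

lemma pvRootFun_same {L : List String} (hnd : L.Nodup) {p : PySem.Dict String String}
    (hWF : pvWF L p) {a b : String} (ha : a ∈ L) (hb : b ∈ L) :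
    (pvFindB L.length p a = pvFindB L.length p b) ↔ pvSame p a b := by
  have hra := pvFindB_root hWF hnd ha (le_refl _)
  have hrb := pvFindB_root hWF hnd hb (le_refl _)
  constructor
  · intro h
    exact ⟨pvFindB L.length p b, h ▸ hra, hrb⟩
  · rintro ⟨r, h1, h2⟩
    rw [pvRoot_unique hra h1, pvRoot_unique hrb h2]

-- ---------- Section collect-phase equalities (B's staged build = A's paired build) ----------
lemma pvFoldl_snd {α β γ : Type} (F : α × β → γ → α × β) (G : β → γ → β)
    (h : ∀ p r, (F p r).2 = G p.2 r) :
    ∀ (l : List γ) (p : α × β), (l.foldl F p).2 = l.foldl G p.2 := by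
  intro l
  induction l with
  | nil => intro p; rfl
  | cons r l ih =>
    intro p
    simp only [List.foldl_cons]
    rw [ih, h]

lemma pvTr_eq (records : List (List (String × String))) :
    pvCollectB records = (pvCollectA records).2 := by
  unfold pvCollectA pvCollectB
  have hstepB : (fun (tr : PySem.Dict String (List (List (String × String)))) r =>
      if pvRecGetD r "team" "" ≠ "" ∧ pvRecGetD r "weapon" "" ≠ "" then
        let tr1 := tr.setdefault (pvRecGetD r "team" "") []
        tr1.insert (pvRecGetD r "team" "") (tr1.getD (pvRecGetD r "team" "") [] ++ [r])
      else tr) = (fun tr r =>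
      if pvRecGetD r "team" "" ≠ "" ∧ pvRecGetD r "weapon" "" ≠ "" then
        tr.modify (pvRecGetD r "team" "") [] (fun l => l ++ [r])
      else tr) := by
    funext tr r
    dsimp only
    by_cases hc : pvRecGetD r "team" "" ≠ "" ∧ pvRecGetD r "weapon" "" ≠ ""
    · rw [if_pos hc, if_pos hc]
      exact pvSetdefault_insert tr _ [] (fun l => l ++ [r])
    · rw [if_neg hc, if_neg hc]
  rw [hstepB]
  exact (pvFoldl_snd _ _ (fun p r => by
    dsimp only
    by_cases hc : pvRecGetD r "team" "" ≠ "" ∧ pvRecGetD r "weapon" "" ≠ ""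
    · rw [if_pos hc, if_pos hc]
    · rw [if_neg hc, if_neg hc]) records (PySem.Dict.mk [], PySem.Dict.mk [])).symm

lemma pvDerive_keys (tr : PySem.Dict String (List (List (String × String)))) :
    (pvDeriveW tr).keys = tr.keys := by
  show (tr.items.map (fun p => (p.1, pvWeaponsOf p.2))).map Prod.fst = tr.items.map Prod.fst
  rw [List.map_map]
  rfl

lemma pvDerive_size (tr : PySem.Dict String (List (List (String × String)))) :
    (pvDeriveW tr).size = tr.size := by
  show (tr.items.map (fun p => (p.1, pvWeaponsOf p.2))).length = tr.items.length
  rw [List.length_map]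

lemma pvDerive_contains (tr : PySem.Dict String (List (List (String × String)))) (k : String) :
    (pvDeriveW tr).contains k = tr.contains k := by
  rw [PySem.Dict.contains_eq_decide_mem_keys, PySem.Dict.contains_eq_decide_mem_keys,
    pvDerive_keys]

lemma pvDerive_getD (tr : PySem.Dict String (List (List (String × String))))
    (hnd : tr.keys.Nodup) (k : String) :
    (pvDeriveW tr).getD k PySem.Set.empty = pvWeaponsOf (tr.getD k []) := by
  by_cases hc : tr.contains k = true
  · have hnd' : (pvDeriveW tr).keys.Nodup := by rw [pvDerive_keys]; exact hnd
    cases hg : tr.get? k with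
    | none =>
      rw [PySem.Dict.contains_eq_isSome_get?, hg] at hc
      simp at hc
    | some v =>
      have hmem := PySem.Dict.mem_items_of_get?_eq_some _ hg
      have hmem' : (k, pvWeaponsOf v) ∈ (pvDeriveW tr).items := by
        show (k, pvWeaponsOf v) ∈ tr.items.map (fun p => (p.1, pvWeaponsOf p.2))
        exact List.mem_map.mpr ⟨(k, v), hmem, rfl⟩
      rw [PySem.Dict.getD_of_mem_items _ hmem' hnd',
        PySem.Dict.getD_of_mem_items _ hmem hnd]
  · have hc1 : tr.contains k = false := by simpa using hc
    have hc2 : (pvDeriveW tr).contains k = false := by rw [pvDerive_contains]; exact hc1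
    rw [PySem.Dict.getD_of_not_contains _ _ hc2, PySem.Dict.getD_of_not_contains _ _ hc1]
    rfl

lemma pvWeaponsOf_append (l : List (List (String × String))) (r : List (String × String)) :
    pvWeaponsOf (l ++ [r]) = (pvWeaponsOf l).add (pvRecGetD r "weapon" "") := by
  unfold pvWeaponsOf
  rw [List.foldl_append]
  rfl

lemma pvDerive_modify (tr : PySem.Dict String (List (List (String × String))))
    (hnd : tr.keys.Nodup) (team : String) (r : List (String × String)) :
    (pvDeriveW tr).modify team PySem.Set.empty
        (fun s => PySem.Set.add s (pvRecGetD r "weapon" "")) =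
      pvDeriveW (tr.modify team [] (fun l => l ++ [r])) := by
  apply PySem.Dict.ext
  show ((pvDeriveW tr).insert team
      (((pvDeriveW tr).getD team PySem.Set.empty).add (pvRecGetD r "weapon" ""))).items =
    ((tr.insert team (tr.getD team [] ++ [r])).items.map (fun p => (p.1, pvWeaponsOf p.2)))
  by_cases hc : tr.contains team = true
  · have hc' : (pvDeriveW tr).contains team = true := by rw [pvDerive_contains]; exact hc
    rw [PySem.Dict.items_insert_of_contains _ _ hc', PySem.Dict.items_insert_of_contains _ _ hc]
    show ((tr.items.map (fun p => (p.1, pvWeaponsOf p.2))).map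
        (fun p => if (p.1 == team) = true then (team, ((pvDeriveW tr).getD team PySem.Set.empty).add (pvRecGetD r "weapon" "")) else p)) = _
    rw [List.map_map, List.map_map]
    apply List.map_congr_left
    intro p _
    show (if ((p.1, pvWeaponsOf p.2).1 == team) = true then
        (team, ((pvDeriveW tr).getD team PySem.Set.empty).add (pvRecGetD r "weapon" ""))
      else (p.1, pvWeaponsOf p.2)) =
      ((fun q => (q.1, pvWeaponsOf q.2)) (if (p.1 == team) = true then (team, tr.getD team [] ++ [r]) else p))
    by_cases hp : (p.1 == team) = true
    · rw [if_pos hp, if_pos hp]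
      show (team, ((pvDeriveW tr).getD team PySem.Set.empty).add (pvRecGetD r "weapon" "")) =
        (team, pvWeaponsOf (tr.getD team [] ++ [r]))
      rw [pvWeaponsOf_append, pvDerive_getD tr hnd]
    · rw [if_neg hp, if_neg hp]
  · have hc1 : tr.contains team = false := by simpa using hc
    have hc2 : (pvDeriveW tr).contains team = false := by rw [pvDerive_contains]; exact hc1
    rw [PySem.Dict.items_insert_of_not_contains _ _ hc2,
      PySem.Dict.items_insert_of_not_contains _ _ hc1,
      PySem.Dict.getD_of_not_contains _ _ hc2, PySem.Dict.getD_of_not_contains _ _ hc1]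
    rw [List.map_append]
    show (pvDeriveW tr).items ++ [(team, PySem.Set.empty.add (pvRecGetD r "weapon" ""))] =
      (pvDeriveW tr).items ++ [(team, pvWeaponsOf ([] ++ [r]))]
    rw [pvWeaponsOf_append]
    rfl

lemma pvCollect_derive :
    ∀ (records : List (List (String × String)))
      (tp : PySem.Dict String (PySem.Set String) ×
            PySem.Dict String (List (List (String × String)))),
      tp.1 = pvDeriveW tp.2 → tp.2.keys.Nodup →
      (records.foldl (fun tp record =>
        let team := pvRecGetD record "team" ""
        let weapon := pvRecGetD record "weapon" ""
        if team ≠ "" ∧ weapon ≠ "" then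
          (tp.1.modify team PySem.Set.empty (fun s => PySem.Set.add s weapon),
           tp.2.modify team [] (fun l => l ++ [record]))
        else tp) tp).1 =
        pvDeriveW (records.foldl (fun tp record =>
          let team := pvRecGetD record "team" ""
          let weapon := pvRecGetD record "weapon" ""
          if team ≠ "" ∧ weapon ≠ "" then
            (tp.1.modify team PySem.Set.empty (fun s => PySem.Set.add s weapon),
             tp.2.modify team [] (fun l => l ++ [record]))
          else tp) tp).2 := by
  intro records
  induction records with
  | nil => intro tp h _; exact h
  | cons r rs ih =>
    intro tp h hnd
    simp only [List.foldl_cons]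
    by_cases hc : pvRecGetD r "team" "" ≠ "" ∧ pvRecGetD r "weapon" "" ≠ ""
    · rw [if_pos hc]
      apply ih
      · dsimp only
        rw [h]
        exact pvDerive_modify tp.2 hnd _ r
      · exact PySem.Dict.nodup_keys_insert _ _ _ hnd
    · rw [if_neg hc]
      exact ih tp h hnd

lemma pvTw_eq (records : List (List (String × String))) :
    (pvCollectA records).1 = pvDeriveW ((pvCollectA records).2) := by
  unfold pvCollectA
  exact pvCollect_derive records (PySem.Dict.mk [], PySem.Dict.mk []) rfl
    (by simp [PySem.Dict.keys])

-- ---------- Section dedup / grouping-dict characterization ----------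
-- first occurrences of keys not yet seen (the order loop of B / the new keys of A's dict)
def pvNov : List String → List String → List String
  | _, [] => []
  | seen, k :: ks => if k ∈ seen then pvNov seen ks else k :: pvNov (seen ++ [k]) ks

lemma pvNov_not_mem_seen : ∀ {ks seen k}, k ∈ pvNov seen ks → k ∉ seen := by
  intro ks
  induction ks with
  | nil => intro seen k h; simp [pvNov] at h
  | cons x xs ih =>
    intro seen k h
    simp only [pvNov] at h
    split at h
    · exact ih h
    · rcases List.mem_cons.mp h with rfl | h'
      · assumption
      · intro hk
        exact ih h' (List.mem_append_left _ hk)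

lemma pvDedup_foldl : ∀ (ks o : List String),
    ks.foldl (fun o r => if r ∈ o then o else o ++ [r]) o = o ++ pvNov o ks := by
  intro ks
  induction ks with
  | nil => intro o; simp [pvNov]
  | cons r ks ih =>
    intro o
    simp only [List.foldl_cons, pvNov]
    by_cases hc : r ∈ o
    · rw [if_pos hc, if_pos hc, ih]
    · rw [if_neg hc, if_neg hc, ih]
      simp

lemma pvFoldModify_items (f : String → String) :
    ∀ (l : List String) (d : PySem.Dict String (List String)), d.keys.Nodup →
      (l.foldl (fun g t => g.modify (f t) [] (fun s => s ++ [t])) d).items =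
        d.items.map (fun p => (p.1, p.2 ++ l.filter (fun t => f t == p.1)))
        ++ (pvNov d.keys (l.map f)).map (fun k => (k, l.filter (fun t => f t == k))) := by
  intro l
  induction l with
  | nil =>
    intro d _
    simp [pvNov]
  | cons t l ih =>
    intro d hnd
    simp only [List.foldl_cons, List.map_cons]
    by_cases hc : d.contains (f t) = true
    · have hkeys' : (d.modify (f t) [] (fun s => s ++ [t])).keys = d.keys := by
        rw [PySem.Dict.keys_modify, PySem.Dict.keys_insert_of_contains _ _ hc]
      have hnd' : (d.modify (f t) [] (fun s => s ++ [t])).keys.Nodup := by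
        rw [hkeys']; exact hnd
      rw [ih _ hnd', hkeys']
      have hitems : (d.modify (f t) [] (fun s => s ++ [t])).items =
          d.items.map (fun p => if (p.1 == f t) = true then (f t, d.getD (f t) [] ++ [t]) else p) := by
        show (d.insert (f t) (d.getD (f t) [] ++ [t])).items = _
        rw [PySem.Dict.items_insert_of_contains _ _ hc]
      rw [hitems, List.map_map]
      have hmemk : f t ∈ d.keys := (PySem.Dict.contains_iff_mem_keys d (f t)).mp hc
      have hnov : pvNov d.keys (f t :: l.map f) = pvNov d.keys (l.map f) := by
        simp only [pvNov, if_pos hmemk]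
      rw [hnov]
      congr 1
      · apply List.map_congr_left
        intro p hp
        show (fun q => (q.1, q.2 ++ l.filter (fun t' => f t' == q.1)))
            (if (p.1 == f t) = true then (f t, d.getD (f t) [] ++ [t]) else p) =
          (p.1, p.2 ++ (t :: l).filter (fun t' => f t' == p.1))
        by_cases hpt : (p.1 == f t) = true
        · rw [if_pos hpt]
          have hpe : p.1 = f t := by simpa using hpt
          have hv : d.getD (f t) [] = p.2 := by
            have hm : (f t, p.2) ∈ d.items := by rw [← hpe]; exact hp
            exact PySem.Dict.getD_of_mem_items _ hm hnd _
          simp only [List.filter_cons, hpe, beq_self_eq_true, if_pos]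
          rw [hv]
          simp [List.append_assoc]
        · rw [if_neg hpt]
          have hne : ¬ (f t == p.1) = true := by
            simp only [beq_iff_eq] at hpt ⊢
            exact fun h => hpt h.symm
          simp only [List.filter_cons]
          rw [if_neg hne]
      · apply List.map_congr_left
        intro k hk
        have hkn : k ∉ d.keys := pvNov_not_mem_seen hk
        have hne : ¬ (f t == k) = true := by
          simp only [beq_iff_eq]
          intro h
          exact hkn (h ▸ hmemk)
        simp only [List.filter_cons]
        rw [if_neg hne]
    · have hc1 : d.contains (f t) = false := by simpa using hc
      have hnotmem : f t ∉ d.keys := fun h =>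
        (by rw [(PySem.Dict.contains_iff_mem_keys d (f t)).mpr h] at hc1; simp at hc1)
      have hitems : (d.modify (f t) [] (fun s => s ++ [t])).items = d.items ++ [(f t, [t])] := by
        show (d.insert (f t) (d.getD (f t) [] ++ [t])).items = _
        rw [PySem.Dict.getD_of_not_contains _ _ hc1,
          PySem.Dict.items_insert_of_not_contains _ _ hc1]
        rfl
      have hkeys' : (d.modify (f t) [] (fun s => s ++ [t])).keys = d.keys ++ [f t] := by
        rw [PySem.Dict.keys_modify, PySem.Dict.getD_of_not_contains _ _ hc1,
          PySem.Dict.keys_insert_of_not_contains _ _ hc1]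
      have hnd' : (d.modify (f t) [] (fun s => s ++ [t])).keys.Nodup := by
        rw [hkeys']
        refine List.Nodup.append hnd (List.nodup_singleton _) ?_
        intro a ha hb
        rw [List.mem_singleton] at hb
        exact hnotmem (hb ▸ ha)
      rw [ih _ hnd', hitems, hkeys', List.map_append]
      have hnov : pvNov d.keys (f t :: l.map f) =
          f t :: pvNov (d.keys ++ [f t]) (l.map f) := by
        simp only [pvNov, if_neg hnotmem]
      rw [hnov, List.map_cons]
      have h1 : d.items.map (fun p => (p.1, p.2 ++ l.filter (fun t' => f t' == p.1))) =
          d.items.map (fun p => (p.1, p.2 ++ (t :: l).filter (fun t' => f t' == p.1))) := by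
        apply List.map_congr_left
        intro p hp
        have hpk : p.1 ∈ d.keys := List.mem_map.mpr ⟨p, hp, rfl⟩
        have hne : ¬ (f t == p.1) = true := by
          simp only [beq_iff_eq]
          intro h
          exact hnotmem (h ▸ hpk)
        simp only [List.filter_cons]
        rw [if_neg hne]
      have h3 : (pvNov (d.keys ++ [f t]) (l.map f)).map
            (fun k => (k, l.filter (fun t' => f t' == k))) =
          (pvNov (d.keys ++ [f t]) (l.map f)).map
            (fun k => (k, (t :: l).filter (fun t' => f t' == k))) := by
        apply List.map_congr_left
        intro k hk
        have hkn : k ∉ d.keys ++ [f t] := pvNov_not_mem_seen hk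
        have hne : ¬ (f t == k) = true := by
          simp only [beq_iff_eq]
          intro h
          exact hkn (h ▸ List.mem_append_right _ (List.mem_singleton.mpr rfl))
        simp only [List.filter_cons]
        rw [if_neg hne]
      rw [h1, h3]
      simp [List.filter_cons, List.append_assoc]

-- alignment of the two dedup'd root lists under kernel-equal root functions
lemma pvNov_align (fA fB : String → String) (L0 : List String)
    (hker : ∀ a ∈ L0, ∀ b ∈ L0, (fA a = fA b ↔ fB a = fB b)) :
    ∀ (l : List String), (∀ x ∈ l, x ∈ L0) →
    ∀ (sA sB : List String), sA.length = sB.length →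
    (∀ i (h1 : i < sA.length) (h2 : i < sB.length), ∀ t ∈ L0, (sA[i] = fA t ↔ sB[i] = fB t)) →
    (pvNov sA (l.map fA)).length = (pvNov sB (l.map fB)).length ∧
    (∀ i (h1 : i < (pvNov sA (l.map fA)).length) (h2 : i < (pvNov sB (l.map fB)).length),
      ∀ t ∈ L0, ((pvNov sA (l.map fA))[i] = fA t ↔ (pvNov sB (l.map fB))[i] = fB t)) := by
  intro l
  induction l with
  | nil =>
    intro _ sA sB _ _
    refine ⟨rfl, ?_⟩
    intro i h1 h2
    simp [pvNov] at h1
  | cons t0 l ih =>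
    intro hsub sA sB hlen hinv
    have ht0 : t0 ∈ L0 := hsub t0 List.mem_cons_self
    have hsub' : ∀ x ∈ l, x ∈ L0 := fun x hx => hsub x (List.mem_cons_of_mem _ hx)
    have hmem : fA t0 ∈ sA ↔ fB t0 ∈ sB := by
      rw [List.mem_iff_getElem, List.mem_iff_getElem]
      constructor
      · rintro ⟨i, hi, he⟩
        exact ⟨i, hlen ▸ hi, (hinv i hi (hlen ▸ hi) t0 ht0).mp he⟩
      · rintro ⟨i, hi, he⟩
        exact ⟨i, hlen ▸ hi, (hinv i (hlen ▸ hi) hi t0 ht0).mpr he⟩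
    simp only [List.map_cons]
    by_cases hin : fA t0 ∈ sA
    · have hinB : fB t0 ∈ sB := hmem.mp hin
      simp only [pvNov, if_pos hin, if_pos hinB]
      exact ih hsub' sA sB hlen hinv
    · have hinB : fB t0 ∉ sB := fun h => hin (hmem.mpr h)
      simp only [pvNov, if_neg hin, if_neg hinB]
      have hlen' : (sA ++ [fA t0]).length = (sB ++ [fB t0]).length := by
        simp [hlen]
      have hinv' : ∀ i (h1 : i < (sA ++ [fA t0]).length) (h2 : i < (sB ++ [fB t0]).length),
          ∀ t ∈ L0, ((sA ++ [fA t0])[i] = fA t ↔ (sB ++ [fB t0])[i] = fB t) := by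
        intro i h1 h2 t ht
        by_cases hlt : i < sA.length
        · rw [List.getElem_append_left hlt, List.getElem_append_left (hlen ▸ hlt)]
          exact hinv i hlt (hlen ▸ hlt) t ht
        · have hieq : i = sA.length := by
            simp only [List.length_append, List.length_singleton] at h1
            omega
          have e1 : (sA ++ [fA t0])[i] = fA t0 := by
            rw [List.getElem_append_right (by omega)]
            simp [hieq]
          have e2 : (sB ++ [fB t0])[i] = fB t0 := by
            rw [List.getElem_append_right (by rw [← hlen]; omega)]
            simp [hieq, hlen]
          rw [e1, e2]
          exact hker t0 ht0 t ht
      obtain ⟨hl, hp⟩ := ih hsub' (sA ++ [fA t0]) (sB ++ [fB t0]) hlen' hinv'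
      refine ⟨by simp [hl], ?_⟩
      intro i h1 h2 t ht
      cases i with
      | zero =>
        simp only [List.getElem_cons_zero]
        exact hker t0 ht0 t ht
      | succ j =>
        simp only [List.getElem_cons_succ]
        exact hp j (by simpa using h1) (by simpa using h2) t ht

-- `[t for t, rt in zip(L, L.map f) if rt == k]` is a plain filter on L
lemma pvZipFilter (f : String → String) (k : String) :
    ∀ (L : List String),
      ((L.zip (L.map f)).filter (fun p => p.2 == k)).map Prod.fst =
        L.filter (fun t => f t == k) := by
  intro L
  induction L with
  | nil => rfl
  | cons t L ih =>
    simp only [List.map_cons, List.zip_cons_cons, List.filter_cons]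
    by_cases hc : (f t == k) = true
    · rw [if_pos hc, if_pos hc, List.map_cons, ih]
    · rw [if_neg hc, if_neg hc, ih]

-- ---------- Section output phase ----------
-- the common per-group output step, phrased as B computes it
def pvOutStep (records : List (List (String × String)))
    (tw : PySem.Dict String (PySem.Set String))
    (tr : PySem.Dict String (List (List (String × String))))
    (res : PySem.Dict String (List (List (String × String))))
    (teams : List String) : PySem.Dict String (List (List (String × String))) :=
  let gw := teams.foldl (fun s t => PySem.Set.update s (tw.getD t PySem.Set.empty)) PySem.Set.empty
  res.insert
    (if gw ≠ [] then PySem.Str.join "_" (PySem.List.sorted gw (fun x => x) false) else "unknown")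
    (teams.flatMap (fun t => tr.getD t []) ++
      (records.filter (fun r => pvNoTeam r)).filter (fun r => pvWeaponIn r gw))

lemma pvRecIf_eq (gw : PySem.Set String) :
    (fun (l : List (List (String × String))) record =>
      if pvNoTeam record = true then
        if pvWeaponIn record gw = true then l ++ [record] else l
      else l) =
    (fun (l : List (List (String × String))) record =>
      if (pvNoTeam record && pvWeaponIn record gw) = true then l ++ [record] else l) := by
  funext l r
  cases h1 : pvNoTeam r <;> cases h2 : pvWeaponIn r gw <;> simp

-- A's per-group body equals pvOutStep
lemma pvAStep_eq (records : List (List (String × String)))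
    (tw : PySem.Dict String (PySem.Set String))
    (tr : PySem.Dict String (List (List (String × String))))
    (res : PySem.Dict String (List (List (String × String))))
    (teams : List String) :
    (let gw := teams.foldl (fun s t => PySem.Set.update s (tw.getD t PySem.Set.empty)) PySem.Set.empty
     let gr := teams.foldl (fun l t => l ++ tr.getD t []) []
     let gr := records.foldl (fun l record =>
        if pvNoTeam record then
          if pvWeaponIn record gw then l ++ [record] else l
        else l) gr
     let key := if gw ≠ [] then PySem.Str.join "_" (PySem.List.sorted gw (fun x => x) false)
                else "unknown"
     res.insert key gr) = pvOutStep records tw tr res teams := by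
  unfold pvOutStep
  dsimp only
  set gw := teams.foldl (fun s t => PySem.Set.update s (tw.getD t PySem.Set.empty)) PySem.Set.empty
  congr 1
  rw [pvRecIf_eq gw]
  rw [PySem.List.foldl_append_if (fun r => pvNoTeam r && pvWeaponIn r gw) (fun x => x) records]
  rw [PySem.List.foldl_append_eq_flatMap (fun t => tr.getD t []) teams []]
  rw [List.filter_filter]
  have hcomm : (fun (r : List (String × String)) => pvWeaponIn r gw && pvNoTeam r) =
      (fun r => pvNoTeam r && pvWeaponIn r gw) := by
    funext r
    exact Bool.and_comm _ _
  rw [hcomm]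
  simp

-- ---------- Section assembly ----------
def pvTailA (records : List (List (String × String)))
    (tw : PySem.Dict String (PySem.Set String))
    (tr : PySem.Dict String (List (List (String × String)))) :
    List (String × List (List (String × String))) :=
  let teams_list := tw.keys
  let parent0 := teams_list.foldl (fun p t => p.insert t t) (PySem.Dict.mk [])
  let parent1 := (PySem.List.enumerate teams_list 0).foldl (fun p it =>
      (PySem.List.slice teams_list (some (it.1 + 1)) none).foldl (fun p t2 =>
        if PySem.Set.inter (tw.getD it.2 PySem.Set.empty) (tw.getD t2 PySem.Set.empty) ≠ [] then
          pvUnionA p it.2 t2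
        else p) p) parent0
  let gp := teams_list.foldl (fun (gp : PySem.Dict String (List String) × PySem.Dict String String) team =>
      let rp := pvFindA gp.2.size gp.2 team
      (gp.1.modify rp.1 [] (fun l => l ++ [team]), rp.2)) (PySem.Dict.mk [], parent1)
  let team_groups := gp.1
  if team_groups.size = 1 then [("all", records)]
  else
    (team_groups.items.foldl (fun res rt =>
      let gw := rt.2.foldl (fun s t => PySem.Set.update s (tw.getD t PySem.Set.empty)) PySem.Set.empty
      let gr := rt.2.foldl (fun l t => l ++ tr.getD t []) []
      let gr := records.foldl (fun l record =>
          if pvNoTeam record then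
            if pvWeaponIn record gw then l ++ [record] else l
          else l) gr
      let key := if gw ≠ [] then PySem.Str.join "_" (PySem.List.sorted gw (fun x => x) false)
                 else "unknown"
      res.insert key gr) (PySem.Dict.mk [] : PySem.Dict String (List (List (String × String))))).items

def pvTailB (records : List (List (String × String)))
    (tw : PySem.Dict String (PySem.Set String))
    (tr : PySem.Dict String (List (List (String × String)))) :
    List (String × List (List (String × String))) :=
  let wt := tw.items.foldl (fun wt tws =>
      tws.2.foldl (fun (wt : PySem.Dict String (List String)) w =>
        let wt1 := wt.setdefault w []
        wt1.insert w (wt1.getD w [] ++ [tws.1])) wt) (PySem.Dict.mk [])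
  let parent0 := tr.keys.foldl (fun p t => p.insert t t) (PySem.Dict.mk [])
  let parent := wt.values.foldl (fun p teams =>
      match teams with
      | [] => p
      | t0 :: rest => rest.foldl (fun p t =>
          let ra := pvFindB p.size p t0
          let rb := pvFindB p.size p t
          if ra ≠ rb then p.insert rb ra else p) p) parent0
  let teams_list := tr.keys
  let roots := teams_list.map (fun t => pvFindB parent.size parent t)
  let order := roots.foldl (fun o r => if r ∈ o then o else o ++ [r]) []
  if order.length = 1 then [("all", records)]
  else
    let orphans := records.filter (fun r => pvNoTeam r)
    (order.foldl (fun res root =>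
      let teams := ((teams_list.zip roots).filter (fun p => p.2 == root)).map Prod.fst
      let gw := teams.foldl (fun s t => PySem.Set.update s (tw.getD t PySem.Set.empty)) PySem.Set.empty
      let gr := teams.flatMap (fun t => tr.getD t [])
      let gr := gr ++ orphans.filter (fun r => pvWeaponIn r gw)
      let key := if gw ≠ [] then PySem.Str.join "_" (PySem.List.sorted gw (fun x => x) false)
                 else "unknown"
      res.insert key gr) (PySem.Dict.mk [] : PySem.Dict String (List (List (String × String))))).items

lemma pvPortA_split (records : List (List (String × String))) :
    group_by_weapons_py records =
      if (pvCollectA records).1.size = 0 then [("all", records)]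
      else pvTailA records (pvCollectA records).1 (pvCollectA records).2 := rfl

lemma pvPortB_split (records : List (List (String × String))) :
    group_by_weapons_py_alt records =
      if (pvCollectB records).size = 0 then [("all", records)]
      else pvTailB records (pvDeriveW (pvCollectB records)) (pvCollectB records) := rfl

lemma pvTail_eq (records : List (List (String × String)))
    (tw : PySem.Dict String (PySem.Set String))
    (tr : PySem.Dict String (List (List (String × String))))
    (htw : tw = pvDeriveW tr)
    (hnd : tw.keys.Nodup) (hvals : ∀ tws ∈ tw.items, List.Nodup tws.2) :
    pvTailA records tw tr = pvTailB records tw tr := by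
  have hkeystr : tr.keys = tw.keys := by rw [htw, pvDerive_keys]
  simp only [pvTailA, pvTailB]
  rw [hkeystr, pvWt_modify tw]
  set L := tw.keys with hL
  obtain ⟨hWF0, hsame0⟩ := pvParent0_spec hnd
  set p0 := L.foldl (fun p t => p.insert t t) (PySem.Dict.mk []) with hp0
  -- A's union loop as a fold over the filtered pair list
  have hA1 : (PySem.List.enumerate L 0).foldl (fun p it =>
      (PySem.List.slice L (some (it.1 + 1)) none).foldl (fun p t2 =>
        if PySem.Set.inter (tw.getD it.2 PySem.Set.empty) (tw.getD t2 PySem.Set.empty) ≠ [] then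
          pvUnionA p it.2 t2
        else p) p) p0 = (pvPairsA tw L).foldl (fun p pr => pvUnionA p pr.1 pr.2) p0 := by
    have h1 := pvEnumSliceFold (α := PySem.Dict String String) L
      (fun p a b => if PySem.Set.inter (tw.getD a PySem.Set.empty) (tw.getD b PySem.Set.empty) ≠ [] then
        pvUnionA p a b else p) L 0 p0 rfl
    have h2 := pvFoldl_if_filter (fun pr : String × String => pvCond tw pr.1 pr.2)
      (fun p pr => pvUnionA p pr.1 pr.2) (pvPairsOf L) p0
    exact h1.trans h2
  rw [hA1]
  set pA := (pvPairsA tw L).foldl (fun p pr => pvUnionA p pr.1 pr.2) p0 with hpAdef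
  have hmemA : ∀ pr ∈ pvPairsA tw L, pr.1 ∈ L ∧ pr.2 ∈ L :=
    fun pr hpr => mem_pvPairsOf_mem (List.mem_of_mem_filter hpr)
  have hUF_A := pvFoldUnion (L := L) (step := fun p pr => pvUnionA p pr.1 pr.2)
    (fun p a b hW ha hb => pvUnionA_spec hnd hW ha hb) (pvPairsA tw L) p0 hWF0 hmemA
  have hsameA : ∀ x y, pvSame pA x y ↔
      Relation.EqvGen (fun u v => u = v ∨ (u, v) ∈ pvPairsA tw L) x y := by
    intro x y
    refine (hUF_A.2 x y).trans (pvEqvGen_congr ?_ ?_ x y)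
    · exact fun u v h => Relation.EqvGen.rel u v (h.imp (fun hs => (hsame0 u v).mp hs) id)
    · exact fun u v h => Relation.EqvGen.rel u v (h.imp (fun hs => (hsame0 u v).mpr hs) id)
  -- B's union loop as a fold over its pair list
  set vals := (pvWtOf tw).values with hvalsdef
  have hB1 : vals.foldl (fun p teams =>
      match teams with
      | [] => p
      | t0 :: rest => rest.foldl (fun p t =>
          if pvFindB p.size p t0 ≠ pvFindB p.size p t then
            p.insert (pvFindB p.size p t) (pvFindB p.size p t0)
          else p) p) p0 = (pvPairsB vals).foldl pvStepB p0 :=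
    (pvPairsB_fold pvStepB vals p0).symm
  rw [hB1]
  set pB := (pvPairsB vals).foldl pvStepB p0 with hpBdef
  have hmemB : ∀ pr ∈ pvPairsB vals, pr.1 ∈ L ∧ pr.2 ∈ L := by
    intro pr hpr
    obtain ⟨teams, hteams, rest, hshape, ht⟩ := pvPairsB_elim hpr
    have hex : ∃ w, (pvWtOf tw).getD w [] = teams := by
      obtain ⟨p, hp, hpe⟩ := List.mem_map.mp hteams
      exact ⟨p.1, by
        rw [PySem.Dict.getD_of_mem_items _ (by exact hp) (pvWt_keys_nodup tw) []]
        exact hpe⟩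
    obtain ⟨w, hw⟩ := hex
    have h1 : pr.1 ∈ (pvWtOf tw).getD w [] := by
      rw [hw, hshape]; exact List.mem_cons_self
    have h2 : pr.2 ∈ (pvWtOf tw).getD w [] := by
      rw [hw, hshape]; exact List.mem_cons_of_mem _ ht
    obtain ⟨ws1, hm1, -⟩ := (pvMem_teams hvals).mp h1
    obtain ⟨ws2, hm2, -⟩ := (pvMem_teams hvals).mp h2
    constructor
    · rw [hL]; exact List.mem_map.mpr ⟨(pr.1, ws1), hm1, rfl⟩
    · rw [hL]; exact List.mem_map.mpr ⟨(pr.2, ws2), hm2, rfl⟩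
  have hUF_B := pvFoldUnion (L := L) (step := pvStepB)
    (fun p a b hW ha hb => pvStepB_spec hnd hW ha hb) (pvPairsB vals) p0 hWF0 hmemB
  have hsameB : ∀ x y, pvSame pB x y ↔
      Relation.EqvGen (fun u v => u = v ∨ (u, v) ∈ pvPairsB vals) x y := by
    intro x y
    refine (hUF_B.2 x y).trans (pvEqvGen_congr ?_ ?_ x y)
    · exact fun u v h => Relation.EqvGen.rel u v (h.imp (fun hs => (hsame0 u v).mp hs) id)
    · exact fun u v h => Relation.EqvGen.rel u v (h.imp (fun hs => (hsame0 u v).mpr hs) id)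
  -- equal kernels of the two root functions
  have hkernel : ∀ a ∈ L, ∀ b ∈ L,
      ((pvFindB L.length pA a = pvFindB L.length pA b) ↔
       (pvFindB L.length pB a = pvFindB L.length pB b)) := by
    intro a ha b hb
    rw [pvRootFun_same hnd hUF_A.1 ha hb, pvRootFun_same hnd hUF_B.1 ha hb,
      hsameA, hsameB]
    exact pvClosure tw hnd hvals a b
  set fA := fun t => pvFindB L.length pA t with hfA
  set fB := fun t => pvFindB L.length pB t with hfB
  -- A's grouping loop
  have hGA : (L.foldl (fun (gp : PySem.Dict String (List String) × PySem.Dict String String) team =>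
      (gp.1.modify (pvFindA gp.2.size gp.2 team).1 [] (fun l => l ++ [team]),
        (pvFindA gp.2.size gp.2 team).2)) (PySem.Dict.mk [], pA)).1 =
      L.foldl (fun g t => g.modify (fA t) [] (fun l => l ++ [t]))
        (PySem.Dict.mk []) :=
    pvGroupA hnd pA hUF_A.1 L (PySem.Dict.mk []) pA hUF_A.1 (fun y s => Iff.rfl) (fun t ht => ht)
  rw [hGA]
  -- A's groups dict characterized
  have hitemsA : (L.foldl (fun g t => g.modify (fA t) [] (fun l => l ++ [t]))
      (PySem.Dict.mk [] : PySem.Dict String (List String))).items =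
      (pvNov [] (L.map fA)).map (fun k => (k, L.filter (fun t => fA t == k))) := by
    rw [pvFoldModify_items fA L (PySem.Dict.mk []) (by simp [PySem.Dict.keys])]
    rfl
  -- B's order list
  have hBsz : pB.size = L.length := pvSize_eq hUF_B.1
  rw [hBsz]
  have horder : (L.map fB).foldl (fun o r => if r ∈ o then o else o ++ [r]) [] =
      pvNov [] (L.map fB) := by
    rw [pvDedup_foldl]
    rfl
  rw [horder]
  -- alignment of the two dedup'd root lists
  obtain ⟨halen, haidx⟩ := pvNov_align fA fB L hkernel L (fun x hx => hx) [] [] rfl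
    (fun i h1 h2 => by simp at h1)
  -- sizes of the two group containers agree
  have hsizeA : (L.foldl (fun g t => g.modify (fA t) [] (fun l => l ++ [t]))
      (PySem.Dict.mk [] : PySem.Dict String (List String))).size =
      (pvNov [] (L.map fB)).length := by
    show (L.foldl (fun g t => g.modify (fA t) [] (fun l => l ++ [t]))
      (PySem.Dict.mk [] : PySem.Dict String (List String))).items.length = _
    rw [hitemsA, List.length_map, halen]
  rw [hsizeA]
  by_cases hone : (pvNov [] (L.map fB)).length = 1
  · rw [if_pos hone, if_pos hone]
  · rw [if_neg hone, if_neg hone]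
    -- A's output fold
    have hAout : ∀ (itms : List (String × List String)),
        (itms.foldl (fun res rt =>
          let gw := rt.2.foldl (fun s t => PySem.Set.update s (tw.getD t PySem.Set.empty)) PySem.Set.empty
          let gr := rt.2.foldl (fun l t => l ++ tr.getD t []) []
          let gr := records.foldl (fun l record =>
              if pvNoTeam record then
                if pvWeaponIn record gw then l ++ [record] else l
              else l) gr
          let key := if gw ≠ [] then PySem.Str.join "_" (PySem.List.sorted gw (fun x => x) false)
                     else "unknown"
          res.insert key gr) (PySem.Dict.mk [] : PySem.Dict String (List (List (String × String))))) =
        (itms.map Prod.snd).foldl (pvOutStep records tw tr)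
          (PySem.Dict.mk [] : PySem.Dict String (List (List (String × String)))) := by
      intro itms
      rw [List.foldl_map]
      congr 1
      funext res rt
      exact pvAStep_eq records tw tr res rt.2
    rw [hAout, hitemsA, List.map_map]
    -- B's output fold
    have hBout : (pvNov [] (L.map fB)).foldl (fun res root =>
        let teams := ((L.zip (L.map fB)).filter (fun p => p.2 == root)).map Prod.fst
        let gw := teams.foldl (fun s t => PySem.Set.update s (tw.getD t PySem.Set.empty)) PySem.Set.empty
        let gr := teams.flatMap (fun t => tr.getD t [])
        let gr := gr ++ (records.filter (fun r => pvNoTeam r)).filter (fun r => pvWeaponIn r gw)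
        let key := if gw ≠ [] then PySem.Str.join "_" (PySem.List.sorted gw (fun x => x) false)
                   else "unknown"
        res.insert key gr) (PySem.Dict.mk [] : PySem.Dict String (List (List (String × String)))) =
        ((pvNov [] (L.map fB)).map (fun k => L.filter (fun t => fB t == k))).foldl
          (pvOutStep records tw tr)
          (PySem.Dict.mk [] : PySem.Dict String (List (List (String × String)))) := by
      rw [List.foldl_map]
      congr 1
      funext res root
      rw [pvZipFilter fB root L]
      rfl
    rw [hBout]
    -- the two teams-lists sequences are equal
    have hlists : (pvNov [] (L.map fA)).map
          ((fun k => L.filter (fun t => fA t == k))) =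
        (pvNov [] (L.map fB)).map (fun k => L.filter (fun t => fB t == k)) := by
      apply List.ext_getElem
      · rw [List.length_map, List.length_map, halen]
      · intro i hi1 hi2
        rw [List.length_map] at hi1 hi2
        simp only [List.getElem_map]
        apply List.filter_congr
        intro t ht
        have hiff := haidx i hi1 hi2 t ht
        rw [Bool.eq_iff_iff, beq_iff_eq, beq_iff_eq]
        constructor
        · intro h; exact (hiff.mp h.symm).symm
        · intro h; exact (hiff.mpr h.symm).symm
    have hcomp : ((fun p : String × List String => p.2) ∘
          (fun k => (k, L.filter (fun t => fA t == k)))) =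
        (fun k => L.filter (fun t => fA t == k)) := rfl
    rw [hcomp, hlists]

-- ===== VERDICT (by name: the statement is the Claim_ definition above) =====
theorem group_by_weapons_py_spec : Claim_equal_group_by_weapons_py := by
  intro records _
  show group_by_weapons_py records = group_by_weapons_py_alt records
  rw [pvPortA_split, pvPortB_split, pvTr_eq]
  obtain ⟨hnd, hvals⟩ := pvCollect_inv records
  have htw := pvTw_eq records
  have hsz : (pvCollectA records).1.size = (pvCollectA records).2.size := by
    rw [htw, pvDerive_size]
  by_cases h0 : (pvCollectA records).2.size = 0
  · rw [if_pos (hsz.trans h0), if_pos h0]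
  · rw [if_neg (fun h => h0 (hsz.symm.trans h)), if_neg h0]
    rw [← htw]
    exact pvTail_eq records _ _ htw hnd hvals
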